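-- pv_equiv track=rewrite | github.com/Ag3497120/verantyx-v6 | synth_results/3bd292e8.py | transform
-- ===== SOURCE A (Python) =====
-- from collections import deque, Counter
--
-- def transform(grid):
--     rows = len(grid)
--     cols = len(grid[0])
--     result = [list(row) for row in grid]
--
--     # Find path color (minority value)
--     cnt = Counter(v for row in grid for v in row)
--     # path color is 2 (or the less common non-background value)
--     path_color = 2
--
--     visited = [[False]*cols for _ in range(rows)]
--     # Mark path as visited
--     for r in range(rows):
--         for c in range(cols):
--             if grid[r][c] == path_color:
--                 visited[r][c] = True
--
--     def bfs(sr, sc):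
--         q = deque([(sr, sc)])
--         visited[sr][sc] = True
--         cells = [(sr, sc)]
--         while q:
--             r, c = q.popleft()
--             for dr, dc in [(-1,0),(1,0),(0,-1),(0,1)]:
--                 nr, nc = r+dr, c+dc
--                 if 0<=nr<rows and 0<=nc<cols and not visited[nr][nc]:
--                     visited[nr][nc] = True
--                     q.append((nr, nc))
--                     cells.append((nr, nc))
--         return cells
--
--     regions = []
--     for r in range(rows):
--         for c in range(cols):
--             if not visited[r][c]:
--                 cells = bfs(r, c)
--                 regions.append(cells)
--
--     if not regions:
--         return result
--
--     # Largest region = 3, all others = 5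
--     max_len = max(len(r) for r in regions)
--     for region in regions:
--         color = 3 if len(region) == max_len else 5
--         for r, c in region:
--             result[r][c] = color
--
--     return result
-- ===== SOURCE B (Python) =====
-- def transform(grid):
--     rows = len(grid)
--     cols = len(grid[0])
--     result = [list(row) for row in grid]
--     n = rows * cols
--     free = [grid[i // cols][i % cols] != 2 for i in range(n)]
--     if True not in free:
--         return result
--     # synchronous min-label propagation to a fixpoint: connected free cells end
--     # up sharing the minimal flat index of their component
--     lab = list(range(n))
--     while True:
--         new = []
--         for i in range(n):
--             v = lab[i]
--             if free[i]:
--                 r, c = i // cols, i % cols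
--                 for nr, nc in ((r - 1, c), (r + 1, c), (r, c - 1), (r, c + 1)):
--                     if 0 <= nr < rows and 0 <= nc < cols and free[nr * cols + nc]:
--                         j = nr * cols + nc
--                         if lab[j] < v:
--                             v = lab[j]
--             new.append(v)
--         if new == lab:
--             break
--         lab = new
--     cnt = {}
--     for i in range(n):
--         if free[i]:
--             cnt[lab[i]] = cnt.get(lab[i], 0) + 1
--     m = max(cnt.values())
--     for i in range(n):
--         if free[i]:
--             result[i // cols][i % cols] = 3 if cnt[lab[i]] == m else 5
--     return result
-- ===== Notes on version B (the rewrite author's own statement) =====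
-- stated objective: alternative
-- what changed: Replaced the per-seed BFS flood fill (queue, mutable visited matrix, region cell lists) by a synchronous minimum-label propagation over a flat cell array iterated to a fixpoint: connected non-path cells converge to the minimal flat index of their component, and a counter over final labels yields each component's size and the maximum.
import Mathlib
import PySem

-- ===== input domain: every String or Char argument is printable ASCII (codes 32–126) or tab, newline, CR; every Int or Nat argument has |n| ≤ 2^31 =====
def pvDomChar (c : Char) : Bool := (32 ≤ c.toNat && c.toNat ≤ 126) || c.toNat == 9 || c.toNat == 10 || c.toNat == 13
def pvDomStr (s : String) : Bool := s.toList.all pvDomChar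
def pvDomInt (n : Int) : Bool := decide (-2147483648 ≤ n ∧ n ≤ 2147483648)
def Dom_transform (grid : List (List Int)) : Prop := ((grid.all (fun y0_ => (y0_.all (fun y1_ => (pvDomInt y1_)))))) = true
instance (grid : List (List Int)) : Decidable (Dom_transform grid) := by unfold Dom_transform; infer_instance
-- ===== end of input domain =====

-- B replaces A's per-seed BFS flood fill by fixpoint minimum-label propagation over a flat
-- cell array (objective: alternative algorithm, same return value; no speed claim).

-- ===== PORT A =====
def pvVal (g : List (List Int)) (r c : Nat) : Int := (g.getD r []).getD c 0
def pvGetB (v : List (List Bool)) (r c : Nat) : Bool := (v.getD r []).getD c true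
def pvSetB (v : List (List Bool)) (r c : Nat) : List (List Bool) := v.set r ((v.getD r []).set c true)
def pvSetI (v : List (List Int)) (r c : Nat) (x : Int) : List (List Int) := v.set r ((v.getD r []).set c x)
def pvNbrs (r c : Nat) : List (Int × Int) :=
  [((r:Int)-1,(c:Int)), ((r:Int)+1,(c:Int)), ((r:Int),(c:Int)-1), ((r:Int),(c:Int)+1)]

def pvBfsPush (rows cols : Nat) (st : List (List Bool) × List (Nat × Nat) × List (Nat × Nat))
    (nb : Int × Int) : List (List Bool) × List (Nat × Nat) × List (Nat × Nat) :=
  if 0 ≤ nb.1 ∧ nb.1 < (rows:Int) ∧ 0 ≤ nb.2 ∧ nb.2 < (cols:Int) ∧ pvGetB st.1 nb.1.toNat nb.2.toNat = false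
  then (pvSetB st.1 nb.1.toNat nb.2.toNat, st.2.1 ++ [(nb.1.toNat, nb.2.toNat)], st.2.2 ++ [(nb.1.toNat, nb.2.toNat)])
  else st

def pvBfsLoop (rows cols : Nat) : Nat → List (Nat × Nat) → List (List Bool) → List (Nat × Nat) →
    List (List Bool) × List (Nat × Nat)
  | 0, _, vis, cells => (vis, cells)
  | _+1, [], vis, cells => (vis, cells)
  | fuel+1, (r,c) :: q', vis, cells =>
      let st := (pvNbrs r c).foldl (pvBfsPush rows cols) (vis, q', cells)
      pvBfsLoop rows cols fuel st.2.1 st.1 st.2.2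

def pvBfs (rows cols sr sc : Nat) (vis : List (List Bool)) : List (List Bool) × List (Nat × Nat) :=
  pvBfsLoop rows cols (rows*cols+1) [(sr,sc)] (pvSetB vis sr sc) [(sr,sc)]

def transform (grid : List (List Int)) : List (List Int) :=
  let rows := grid.length
  let cols := grid.headI.length
  let result := grid.map (fun row => row.map id)
  let visited0 : List (List Bool) := List.replicate rows (List.replicate cols false)
  let visited := (List.range rows).foldl (fun vis r =>
      (List.range cols).foldl (fun vis c =>
        if pvVal grid r c = 2 then pvSetB vis r c else vis) vis) visited0
  let scan := (List.range rows).foldl (fun (st : List (List Bool) × List (List (Nat × Nat))) r =>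
      (List.range cols).foldl (fun st c =>
        if pvGetB st.1 r c = false then
          let p := pvBfs rows cols r c st.1
          (p.1, st.2 ++ [p.2])
        else st) st) (visited, [])
  match scan.2 with
  | [] => result
  | reg0 :: rest =>
    let maxLen := ((reg0 :: rest).map List.length).foldl max 0
    (reg0 :: rest).foldl (fun res region =>
      let color : Int := if region.length = maxLen then 3 else 5
      region.foldl (fun res p => pvSetI res p.1 p.2 color) res) result

-- ===== PORT B =====
def pvStep (rows cols : Nat) (free : List Bool) (lab : List Nat) : List Nat :=
  (List.range (rows*cols)).map (fun i =>
    if free.getD i false then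
      (pvNbrs (i / cols) (i % cols)).foldl (fun v nb =>
        if 0 ≤ nb.1 ∧ nb.1 < (rows:Int) ∧ 0 ≤ nb.2 ∧ nb.2 < (cols:Int) ∧
            free.getD (nb.1.toNat * cols + nb.2.toNat) false = true
        then min v (lab.getD (nb.1.toNat * cols + nb.2.toNat) 0) else v) (lab.getD i 0)
    else lab.getD i 0)

def pvFixLoop (rows cols : Nat) (free : List Bool) : Nat → List Nat → List Nat
  | 0, lab => lab
  | fuel+1, lab =>
      let new := pvStep rows cols free lab
      if new = lab then lab else pvFixLoop rows cols free fuel new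

def transform_alt (grid : List (List Int)) : List (List Int) :=
  let rows := grid.length
  let cols := grid.headI.length
  let result := grid.map (fun row => row.map id)
  let n := rows * cols
  let free : List Bool := (List.range n).map (fun i => decide (pvVal grid (i / cols) (i % cols) ≠ 2))
  if free.contains true then
    let lab := pvFixLoop rows cols free (n*n+1) (List.range n)
    let cnt := (List.range n).foldl (fun (cnt : PySem.Dict Nat Nat) i =>
        if free.getD i false then cnt.modify (lab.getD i 0) 0 (· + 1) else cnt) PySem.Dict.empty
    let m := match cnt.values with | [] => 0 | v :: vs => vs.foldl max v
    (List.range n).foldl (fun res i =>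
      if free.getD i false then
        pvSetI res (i / cols) (i % cols) (if cnt.getD (lab.getD i 0) 0 = m then 3 else 5)
      else res) result
  else result

-- ===== PRECONDITION & SPEC =====
-- Pre_ excludes exactly the inputs on which A raises IndexError: the empty grid
-- (grid[0]) and grids whose later rows are shorter than row 0 (grid[r][c] in the
-- path-marking scan).  On every other input A returns normally.
def Pre_transform (grid : List (List Int)) : Prop :=
  grid ≠ [] ∧ ∀ row ∈ grid, grid.headI.length ≤ row.length
instance (grid : List (List Int)) : Decidable (Pre_transform grid) := by unfold Pre_transform; infer_instance
def pvWitness_transform : List (List Int) := [[1, 2], [2, 1]]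

def Spec_transform (grid : List (List Int)) (out : List (List Int)) : Prop := out = transform_alt grid
instance (grid : List (List Int)) (out : List (List Int)) : Decidable (Spec_transform grid out) := by unfold Spec_transform; infer_instance

-- ===== CLAIM (what is proved, stated in full; the proofs are below) =====
def Claim_equal_transform : Prop := ∀ (grid : List (List Int)), Dom_transform grid → Pre_transform grid → Spec_transform grid (transform grid)

-- ===== LEMMAS AND PROOFS =====
-- ===== model =====
def InRect (g : List (List Int)) (p : Nat × Nat) : Prop := p.1 < g.length ∧ p.2 < g.headI.length
def FreeP (g : List (List Int)) (p : Nat × Nat) : Prop := InRect g p ∧ pvVal g p.1 p.2 ≠ 2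
def TouchP (p q : Nat × Nat) : Prop :=
  (p.1 = q.1 ∧ (p.2 + 1 = q.2 ∨ q.2 + 1 = p.2)) ∨ (p.2 = q.2 ∧ (p.1 + 1 = q.1 ∨ q.1 + 1 = p.1))
def AdjP (g : List (List Int)) (p q : Nat × Nat) : Prop := FreeP g p ∧ FreeP g q ∧ TouchP p q
def ReachP (g : List (List Int)) (p q : Nat × Nat) : Prop := Relation.ReflTransGen (AdjP g) p q

lemma touch_symm {p q : Nat × Nat} (h : TouchP p q) : TouchP q p := by unfold TouchP at *; omega

lemma adj_symm {g : List (List Int)} {p q : Nat × Nat} (h : AdjP g p q) : AdjP g q p :=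
  ⟨h.2.1, h.1, touch_symm h.2.2⟩

lemma reach_symm {g : List (List Int)} {p q : Nat × Nat} (h : ReachP g p q) : ReachP g q p :=
  Relation.ReflTransGen.symmetric (fun _ _ hh => adj_symm hh) h

lemma reach_free {g : List (List Int)} {s p : Nat × Nat} (h : ReachP g s p) (hs : FreeP g s) :
    FreeP g p := by
  induction h with
  | refl => exact hs
  | tail _ hadj _ => exact hadj.2.1

-- ===== 2D boolean/int matrix helpers =====
def WFV (R C : Nat) (v : List (List Bool)) : Prop := v.length = R ∧ ∀ row ∈ v, row.length = C


lemma WFV_setB {R C : Nat} {v : List (List Bool)} (h : WFV R C v) (r c : Nat) :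
    WFV R C (pvSetB v r c) := by
  unfold pvSetB
  by_cases hr : r < v.length
  · refine ⟨by simp [h.1], ?_⟩
    intro row hrow
    rcases List.mem_or_eq_of_mem_set hrow with h' | h'
    · exact h.2 _ h'
    · subst h'
      rw [List.length_set, List.getD_eq_getElem _ _ hr]
      exact h.2 _ (List.getElem_mem hr)
  · rw [List.set_eq_of_length_le (by omega)]; exact h

lemma getB_setB_same {v : List (List Bool)} {r c : Nat} (hr : r < v.length)
    (hc : c < (v.getD r []).length) : pvGetB (pvSetB v r c) r c = true := by
  unfold pvGetB pvSetB
  simp only [List.getD_eq_getElem?_getD]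
  rw [List.getElem?_set_self hr, Option.getD_some,
    List.getElem?_set_self (by simpa [List.getD_eq_getElem?_getD] using hc), Option.getD_some]

lemma getB_setB_other {v : List (List Bool)} {r c r' c' : Nat} (h : (r', c') ≠ (r, c)) :
    pvGetB (pvSetB v r c) r' c' = pvGetB v r' c' := by
  unfold pvGetB pvSetB
  simp only [List.getD_eq_getElem?_getD, List.getElem?_set]
  by_cases hrr : r = r'
  · subst hrr
    have hcc : c ≠ c' := by rintro rfl; exact h rfl
    by_cases hlen : r < v.length
    · simp [hlen, hcc]
    · simp [hlen]
  · simp [hrr]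

-- pvSetI shape and getter lemmas
lemma len_setI {v : List (List Int)} {r c : Nat} {x : Int} : (pvSetI v r c x).length = v.length := by
  simp [pvSetI]

lemma rowlen_setI {v : List (List Int)} {r c : Nat} {x : Int} (i : Nat) :
    ((pvSetI v r c x).getD i []).length = (v.getD i []).length := by
  unfold pvSetI
  simp only [List.getD_eq_getElem?_getD, List.getElem?_set]
  by_cases hrr : r = i
  · subst hrr
    by_cases hlen : r < v.length
    · simp [hlen]
    · simp [hlen]
  · simp [hrr]

lemma val_setI_same {v : List (List Int)} {r c : Nat} {x : Int} (hr : r < v.length)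
    (hc : c < (v.getD r []).length) : pvVal (pvSetI v r c x) r c = x := by
  unfold pvVal pvSetI
  simp only [List.getD_eq_getElem?_getD]
  rw [List.getElem?_set_self hr, Option.getD_some,
    List.getElem?_set_self (by simpa [List.getD_eq_getElem?_getD] using hc), Option.getD_some]

lemma val_setI_other {v : List (List Int)} {r c r' c' : Nat} {x : Int} (h : (r', c') ≠ (r, c)) :
    pvVal (pvSetI v r c x) r' c' = pvVal v r' c' := by
  unfold pvVal pvSetI
  simp only [List.getD_eq_getElem?_getD, List.getElem?_set]
  by_cases hrr : r = r'
  · subst hrr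
    have hcc : c ≠ c' := by rintro rfl; exact h rfl
    by_cases hlen : r < v.length
    · simp [hlen, hcc]
    · simp [hlen]
  · simp [hrr]

-- neighbour candidates ↔ TouchP
lemma mem_pvNbrs_spec {R C r c : Nat} {nb : Int × Int} (h : nb ∈ pvNbrs r c) (h1 : 0 ≤ nb.1)
    (h2 : nb.1 < (R:Int)) (h3 : 0 ≤ nb.2) (h4 : nb.2 < (C:Int)) :
    nb.1.toNat < R ∧ nb.2.toNat < C ∧ TouchP (r, c) (nb.1.toNat, nb.2.toNat) := by
  simp [pvNbrs, Prod.ext_iff] at h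
  unfold TouchP
  rcases h with ⟨ha, hb⟩ | ⟨ha, hb⟩ | ⟨ha, hb⟩ | ⟨ha, hb⟩ <;> simp <;> omega

lemma touch_mem_pvNbrs {r c : Nat} {p : Nat × Nat} (h : TouchP (r, c) p) :
    ∃ nb ∈ pvNbrs r c, 0 ≤ nb.1 ∧ 0 ≤ nb.2 ∧ nb.1.toNat = p.1 ∧ nb.2.toNat = p.2 := by
  unfold TouchP at h
  simp only [pvNbrs, List.mem_cons]
  rcases h with ⟨ha, hb | hb⟩ | ⟨ha, hb | hb⟩
  · exact ⟨((r:Int), (c:Int)+1), by simp, by omega⟩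
  · exact ⟨((r:Int), (c:Int)-1), by simp, by omega⟩
  · exact ⟨((r:Int)+1, (c:Int)), by simp, by omega⟩
  · exact ⟨((r:Int)-1, (c:Int)), by simp, by omega⟩

-- the inner neighbour fold of one BFS dequeue
lemma pushFold_spec (R C : Nat) (nbs : List (Int × Int)) :
    ∀ (vis : List (List Bool)) (q cells : List (Nat × Nat)), WFV R C vis →
    ∃ vis' L, (nbs.foldl (pvBfsPush R C) (vis, q, cells)) = (vis', q ++ L, cells ++ L) ∧
      WFV R C vis' ∧ L.Nodup ∧
      (∀ p : Nat × Nat, pvGetB vis' p.1 p.2 = true ↔ pvGetB vis p.1 p.2 = true ∨ p ∈ L) ∧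
      (∀ p ∈ L, p.1 < R ∧ p.2 < C ∧ pvGetB vis p.1 p.2 = false ∧
        ∃ nb ∈ nbs, 0 ≤ nb.1 ∧ 0 ≤ nb.2 ∧ nb.1.toNat = p.1 ∧ nb.2.toNat = p.2) ∧
      (∀ nb ∈ nbs, 0 ≤ nb.1 → nb.1 < (R:Int) → 0 ≤ nb.2 → nb.2 < (C:Int) →
        pvGetB vis' nb.1.toNat nb.2.toNat = true) := by
  induction nbs with
  | nil =>
    intro vis q cells hWF
    exact ⟨vis, [], by simp, hWF, by simp, by simp, by simp, by simp⟩
  | cons nb nbs ih =>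
    intro vis q cells hWF
    rw [List.foldl_cons]
    by_cases hcond : 0 ≤ nb.1 ∧ nb.1 < (R:Int) ∧ 0 ≤ nb.2 ∧ nb.2 < (C:Int) ∧
        pvGetB vis nb.1.toNat nb.2.toNat = false
    · obtain ⟨h1, h2, h3, h4, h5⟩ := hcond
      have hpush : pvBfsPush R C (vis, q, cells) nb =
          (pvSetB vis nb.1.toNat nb.2.toNat, q ++ [(nb.1.toNat, nb.2.toNat)],
            cells ++ [(nb.1.toNat, nb.2.toNat)]) := by
        unfold pvBfsPush
        rw [if_pos ⟨h1, h2, h3, h4, h5⟩]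
      rw [hpush]
      have haR : nb.1.toNat < R := by omega
      have hbC : nb.2.toNat < C := by omega
      have hr : nb.1.toNat < vis.length := by rw [hWF.1]; exact haR
      have hc : nb.2.toNat < (vis.getD nb.1.toNat []).length := by
        rw [List.getD_eq_getElem _ _ hr, hWF.2 _ (List.getElem_mem hr)]; exact hbC
      have hset_iff : ∀ x : Nat × Nat,
          pvGetB (pvSetB vis nb.1.toNat nb.2.toNat) x.1 x.2 = true ↔
            pvGetB vis x.1 x.2 = true ∨ x = (nb.1.toNat, nb.2.toNat) := by
        intro x
        by_cases hx : x = (nb.1.toNat, nb.2.toNat)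
        · rw [hx]
          simpa using getB_setB_same hr hc
        · rw [getB_setB_other (by simpa [Prod.ext_iff] using hx)]
          simp [hx]
      obtain ⟨vis', L₁, heq, hWF', hnd, hiff, hmem, hlast⟩ :=
        ih (pvSetB vis nb.1.toNat nb.2.toNat) (q ++ [(nb.1.toNat, nb.2.toNat)])
          (cells ++ [(nb.1.toNat, nb.2.toNat)]) (WFV_setB hWF _ _)
      have hsetTrue : pvGetB (pvSetB vis nb.1.toNat nb.2.toNat) nb.1.toNat nb.2.toNat = true :=
        getB_setB_same hr hc
      refine ⟨vis', (nb.1.toNat, nb.2.toNat) :: L₁, ?_, hWF', ?_, ?_, ?_, ?_⟩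
      · rw [heq]; simp
      · refine List.nodup_cons.2 ⟨?_, hnd⟩
        intro hmem₀
        have hfalse := (hmem _ hmem₀).2.2.1
        rw [hsetTrue] at hfalse
        exact absurd hfalse (by simp)
      · intro p
        rw [hiff p, hset_iff p]
        simp [or_assoc]
      · intro p hp
        rcases List.mem_cons.1 hp with hpeq | hp
        · rw [hpeq]
          exact ⟨haR, hbC, h5, nb, List.mem_cons_self, h1, h3, rfl, rfl⟩
        · obtain ⟨hpa, hpb, hpv, nb', hnb', rest⟩ := hmem p hp
          refine ⟨hpa, hpb, ?_, nb', List.mem_cons_of_mem _ hnb', rest⟩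
          have hne : p ≠ (nb.1.toNat, nb.2.toNat) := by
            intro hx
            rw [hx, hsetTrue] at hpv
            exact absurd hpv (by simp)
          rw [getB_setB_other (by simpa [Prod.ext_iff] using hne)] at hpv
          exact hpv
      · intro nb' hnb' g1 g2 g3 g4
        rcases List.mem_cons.1 hnb' with hh | hnb'
        · subst hh
          exact (hiff (nb'.1.toNat, nb'.2.toNat)).2 (Or.inl hsetTrue)
        · exact hlast nb' hnb' g1 g2 g3 g4
    · have hpush : pvBfsPush R C (vis, q, cells) nb = (vis, q, cells) := by
        unfold pvBfsPush
        rw [if_neg hcond]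
      rw [hpush]
      obtain ⟨vis', L, heq, hWF', hnd, hiff, hmem, hlast⟩ := ih vis q cells hWF
      refine ⟨vis', L, heq, hWF', hnd, hiff, ?_, ?_⟩
      · intro p hp
        obtain ⟨hpa, hpb, hpv, nb', hnb', rest⟩ := hmem p hp
        exact ⟨hpa, hpb, hpv, nb', List.mem_cons_of_mem _ hnb', rest⟩
      · intro nb' hnb' g1 g2 g3 g4
        rcases List.mem_cons.1 hnb' with hh | hnb'
        · subst hh
          have hvis : pvGetB vis nb'.1.toNat nb'.2.toNat = true := by
            rcases Bool.eq_false_or_eq_true (pvGetB vis nb'.1.toNat nb'.2.toNat) with ht | hf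
            · exact ht
            · exact absurd ⟨g1, g2, g3, g4, hf⟩ hcond
          exact (hiff (nb'.1.toNat, nb'.2.toNat)).2 (Or.inl hvis)
        · exact hlast nb' hnb' g1 g2 g3 g4

lemma length_le_area {R C : Nat} {l : List (Nat × Nat)} (hnd : l.Nodup)
    (hrect : ∀ p ∈ l, p.1 < R ∧ p.2 < C) : l.length ≤ R * C := by
  have hsub : l.toFinset ⊆ Finset.range R ×ˢ Finset.range C := by
    intro p hp
    have := hrect p (List.mem_toFinset.1 hp)
    simp [Finset.mem_product, this.1, this.2]
  calc l.length = l.toFinset.card := (List.toFinset_card_of_nodup hnd).symm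
    _ ≤ (Finset.range R ×ˢ Finset.range C).card := Finset.card_le_card hsub
    _ = R * C := by simp

lemma bfsLoop_spec (g : List (List Int)) (s : Nat × Nat) (vis0 : List (List Bool))
    (hfree_s : FreeP g s)
    (hpath0 : ∀ p : Nat × Nat, p.1 < g.length → p.2 < g.headI.length → ¬ FreeP g p →
      pvGetB vis0 p.1 p.2 = true)
    (hsep : ∀ p : Nat × Nat, FreeP g p → pvGetB vis0 p.1 p.2 = true → ¬ ReachP g s p) :
    ∀ (fuel : Nat) (q cells : List (Nat × Nat)) (vis : List (List Bool)),
      WFV g.length g.headI.length vis →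
      q.length + (g.length * g.headI.length - cells.length) < fuel →
      (∀ p : Nat × Nat, p.1 < g.length → p.2 < g.headI.length →
        (pvGetB vis p.1 p.2 = true ↔ pvGetB vis0 p.1 p.2 = true ∨ p ∈ cells)) →
      (∀ p ∈ cells, ReachP g s p) →
      s ∈ cells → cells.Nodup →
      (∀ p ∈ q, p ∈ cells) →
      (∀ p ∈ cells, p ∉ q → ∀ p' : Nat × Nat, p'.1 < g.length → p'.2 < g.headI.length →
        TouchP p p' → pvGetB vis p'.1 p'.2 = true) →
      WFV g.length g.headI.length (pvBfsLoop g.length g.headI.length fuel q vis cells).1 ∧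
      (pvBfsLoop g.length g.headI.length fuel q vis cells).2.Nodup ∧
      (∀ p ∈ cells, p ∈ (pvBfsLoop g.length g.headI.length fuel q vis cells).2) ∧
      (∀ p : Nat × Nat, p.1 < g.length → p.2 < g.headI.length →
        (pvGetB (pvBfsLoop g.length g.headI.length fuel q vis cells).1 p.1 p.2 = true ↔
          pvGetB vis0 p.1 p.2 = true ∨ p ∈ (pvBfsLoop g.length g.headI.length fuel q vis cells).2)) ∧
      (∀ p : Nat × Nat, p ∈ (pvBfsLoop g.length g.headI.length fuel q vis cells).2 ↔ ReachP g s p) := by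
  intro fuel
  induction fuel with
  | zero => intro q cells vis _ hfuel; omega
  | succ fuel ih =>
    intro q cells vis hWF hfuel hvisiff hcells hs hnd hq hclosed
    have hcellsFree : ∀ p ∈ cells, FreeP g p := fun p hp => reach_free (hcells p hp) hfree_s
    have hcellsRect : ∀ p ∈ cells, p.1 < g.length ∧ p.2 < g.headI.length := fun p hp =>
      ⟨(hcellsFree p hp).1.1, (hcellsFree p hp).1.2⟩
    match q with
    | [] =>
      have hrun : pvBfsLoop g.length g.headI.length (fuel+1) [] vis cells = (vis, cells) := rfl
      rw [hrun]
      refine ⟨hWF, hnd, fun p hp => hp, hvisiff, fun p => ⟨hcells p, ?_⟩⟩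
      intro hreach
      induction hreach with
      | refl => exact hs
      | tail hstep hadj ihr =>
        rename_i b c
        have hb : b ∈ cells := ihr
        have hcfree : FreeP g c := hadj.2.1
        have hvisc := hclosed b hb (by simp) c hcfree.1.1 hcfree.1.2 hadj.2.2
        rcases (hvisiff c hcfree.1.1 hcfree.1.2).1 hvisc with h0 | hc
        · exact absurd (Relation.ReflTransGen.tail hstep hadj) (hsep c hcfree h0)
        · simpa using hc
    | (xr, xc) :: q' =>
      have hxmem : (xr, xc) ∈ cells := hq _ List.mem_cons_self
      obtain ⟨vis₁, L, heq, hWF₁, hndL, hiffL, hmemL, hlastL⟩ :=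
        pushFold_spec g.length g.headI.length (pvNbrs xr xc) vis q' cells hWF
      have hrun : pvBfsLoop g.length g.headI.length (fuel+1) ((xr, xc) :: q') vis cells =
          pvBfsLoop g.length g.headI.length fuel (q' ++ L) vis₁ (cells ++ L) := by
        show pvBfsLoop g.length g.headI.length fuel
          ((pvNbrs xr xc).foldl (pvBfsPush g.length g.headI.length) (vis, q', cells)).2.1
          ((pvNbrs xr xc).foldl (pvBfsPush g.length g.headI.length) (vis, q', cells)).1
          ((pvNbrs xr xc).foldl (pvBfsPush g.length g.headI.length) (vis, q', cells)).2.2 =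
          pvBfsLoop g.length g.headI.length fuel (q' ++ L) vis₁ (cells ++ L)
        rw [heq]
      rw [hrun]
      -- facts about L
      have hLRect : ∀ p ∈ L, p.1 < g.length ∧ p.2 < g.headI.length := fun p hp =>
        ⟨(hmemL p hp).1, (hmemL p hp).2.1⟩
      have hLFree : ∀ p ∈ L, FreeP g p := by
        intro p hp
        obtain ⟨hpa, hpb, hpv, _⟩ := hmemL p hp
        by_contra hnf
        have := (hvisiff p hpa hpb).2 (Or.inl (hpath0 p hpa hpb hnf))
        rw [hpv] at this
        exact absurd this (by simp)
      have hLAdj : ∀ p ∈ L, AdjP g (xr, xc) p := by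
        intro p hp
        obtain ⟨hpa, hpb, hpv, nb, hnb, hnb1, hnb2, hte1, hte2⟩ := hmemL p hp
        have hnbR : nb.1 < (g.length : Int) := by omega
        have hnbC : nb.2 < (g.headI.length : Int) := by omega
        have htouch := (mem_pvNbrs_spec hnb hnb1 hnbR hnb2 hnbC).2.2
        have hpe : (nb.1.toNat, nb.2.toNat) = p := by
          ext <;> simp [hte1, hte2]
        rw [hpe] at htouch
        exact ⟨hcellsFree _ hxmem, hLFree p hp, htouch⟩
      have hcellsVis : ∀ p ∈ cells, pvGetB vis p.1 p.2 = true := by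
        intro p hp
        exact (hvisiff p (hcellsRect p hp).1 (hcellsRect p hp).2).2 (Or.inr hp)
      have hdisj : ∀ p ∈ L, p ∉ cells := by
        intro p hp hpc
        have h1 := (hmemL p hp).2.2.1
        rw [hcellsVis p hpc] at h1
        exact absurd h1 (by simp)
      have hnd₁ : (cells ++ L).Nodup := by
        rw [List.nodup_append]
        refine ⟨hnd, hndL, ?_⟩
        intro a ha b hb hab
        exact hdisj b hb (hab ▸ ha)
      have hlen₁ : (cells ++ L).length ≤ g.length * g.headI.length :=
        length_le_area hnd₁ (by
          intro p hp
          rcases List.mem_append.1 hp with h | h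
          · simpa using hcellsRect p h
          · exact hLRect p h)
      have hcells₁ : ∀ p ∈ cells ++ L, ReachP g s p := by
        intro p hp
        rcases List.mem_append.1 hp with h | h
        · simpa using hcells p h
        · exact Relation.ReflTransGen.tail (hcells _ hxmem) (hLAdj p h)
      have hvisiff₁ : ∀ p : Nat × Nat, p.1 < g.length → p.2 < g.headI.length →
          (pvGetB vis₁ p.1 p.2 = true ↔ pvGetB vis0 p.1 p.2 = true ∨ p ∈ cells ++ L) := by
        intro p hpa hpb
        rw [hiffL p, hvisiff p hpa hpb, List.mem_append, or_assoc]
      have hclosed₁ : ∀ p ∈ cells ++ L, p ∉ q' ++ L →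
          ∀ p' : Nat × Nat, p'.1 < g.length → p'.2 < g.headI.length → TouchP p p' →
            pvGetB vis₁ p'.1 p'.2 = true := by
        intro p hp hpq p' hpa' hpb' htouch
        rcases List.mem_append.1 hp with hpc | hpL
        · by_cases hpx : p = (xr, xc)
          · subst hpx
            obtain ⟨nb, hnb, hnb1, hnb2, hte1, hte2⟩ := touch_mem_pvNbrs htouch
            have := hlastL nb hnb hnb1 (by omega) hnb2 (by omega)
            rw [hte1, hte2] at this
            exact this
          · have hpnq : p ∉ (xr, xc) :: q' := by
              intro hmem'
              rcases List.mem_cons.1 hmem' with h | h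
              · exact hpx h
              · exact hpq (List.mem_append.2 (Or.inl h))
            exact (hiffL p').2 (Or.inl (hclosed p hpc hpnq p' hpa' hpb' htouch))
        · exact absurd (List.mem_append.2 (Or.inr hpL)) hpq
      have hfuel₁ : (q' ++ L).length + (g.length * g.headI.length - (cells ++ L).length) < fuel := by
        rw [List.length_append, List.length_append] at *
        simp only [List.length_cons] at hfuel
        omega
      obtain ⟨c1, c2, c3, c4, c5⟩ := ih (q' ++ L) (cells ++ L) vis₁ hWF₁ hfuel₁ hvisiff₁ hcells₁
        (List.mem_append.2 (Or.inl hs)) hnd₁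
        (by
          intro p hp
          rcases List.mem_append.1 hp with h | h
          · exact List.mem_append.2 (Or.inl (hq p (List.mem_cons_of_mem _ h)))
          · exact List.mem_append.2 (Or.inr h))
        hclosed₁
      exact ⟨c1, c2, fun p hp => c3 p (List.mem_append.2 (Or.inl hp)), c4, c5⟩

lemma pvBfs_spec (g : List (List Int)) (s : Nat × Nat) (vis0 : List (List Bool))
    (hfree_s : FreeP g s)
    (hpath0 : ∀ p : Nat × Nat, p.1 < g.length → p.2 < g.headI.length → ¬ FreeP g p →
      pvGetB vis0 p.1 p.2 = true)
    (hsep : ∀ p : Nat × Nat, FreeP g p → pvGetB vis0 p.1 p.2 = true → ¬ ReachP g s p)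
    (hWF : WFV g.length g.headI.length vis0) :
    WFV g.length g.headI.length (pvBfs g.length g.headI.length s.1 s.2 vis0).1 ∧
    (pvBfs g.length g.headI.length s.1 s.2 vis0).2.Nodup ∧
    (∀ p : Nat × Nat, p.1 < g.length → p.2 < g.headI.length →
      (pvGetB (pvBfs g.length g.headI.length s.1 s.2 vis0).1 p.1 p.2 = true ↔
        pvGetB vis0 p.1 p.2 = true ∨ p ∈ (pvBfs g.length g.headI.length s.1 s.2 vis0).2)) ∧
    (∀ p : Nat × Nat, p ∈ (pvBfs g.length g.headI.length s.1 s.2 vis0).2 ↔ ReachP g s p) := by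
  have hr : s.1 < vis0.length := by rw [hWF.1]; exact hfree_s.1.1
  have hc : s.2 < (vis0.getD s.1 []).length := by
    rw [List.getD_eq_getElem _ _ hr, hWF.2 _ (List.getElem_mem hr)]; exact hfree_s.1.2
  have hset_iff : ∀ x : Nat × Nat,
      pvGetB (pvSetB vis0 s.1 s.2) x.1 x.2 = true ↔ pvGetB vis0 x.1 x.2 = true ∨ x = s := by
    intro x
    by_cases hx : x = s
    · rw [hx]
      constructor
      · intro _; exact Or.inr rfl
      · intro _; simpa using getB_setB_same hr hc
    · rw [getB_setB_other (by simpa [Prod.ext_iff] using hx)]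
      simp [hx]
  have harea : 0 < g.length * g.headI.length :=
    Nat.mul_pos (by have h1 := hWF.1; omega) (by have := hfree_s.1.2; omega)
  have hmain := bfsLoop_spec g s vis0 hfree_s hpath0 hsep (g.length * g.headI.length + 1)
    [s] [s] (pvSetB vis0 s.1 s.2) (WFV_setB hWF _ _)
    (by
      obtain ⟨n, hn⟩ : ∃ n, g.length * g.headI.length = n := ⟨_, rfl⟩
      have h := harea
      rw [hn] at h ⊢
      simp only [List.length_cons, List.length_nil]
      omega)
    (by
      intro p hpa hpb
      rw [hset_iff p]
      simp)
    (by
      intro p hp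
      rw [List.mem_singleton.1 hp]
      exact Relation.ReflTransGen.refl)
    (by simp) (by simp)
    (by simp)
    (by
      intro p hp hpq
      exact absurd hp hpq)
  have hbfs : pvBfs g.length g.headI.length s.1 s.2 vis0 =
      pvBfsLoop g.length g.headI.length (g.length * g.headI.length + 1) [(s.1, s.2)]
        (pvSetB vis0 s.1 s.2) [(s.1, s.2)] := rfl
  rw [hbfs]
  exact ⟨hmain.1, hmain.2.1, hmain.2.2.2.1, hmain.2.2.2.2⟩

-- initial visited matrix
lemma getB_rep {R C r c : Nat} :
    pvGetB (List.replicate R (List.replicate C false)) r c = true ↔ ¬(r < R ∧ c < C) := by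
  unfold pvGetB
  simp only [List.getD_eq_getElem?_getD, List.getElem?_replicate]
  by_cases hr : r < R
  · simp only [if_pos hr, Option.getD_some]
    by_cases hc : c < C
    · simp [hc, hr]
    · simp [hc, hr]
  · simp [hr]

lemma WFV_rep {R C : Nat} : WFV R C (List.replicate R (List.replicate C false)) := by
  constructor
  · simp
  · intro row hrow
    rw [List.eq_of_mem_replicate hrow]
    simp

-- the path-marking double fold
lemma markCols_spec (g : List (List Int)) (r : Nat) (hr : r < g.length) :
    ∀ (cs : List Nat) (vis : List (List Bool)), (∀ c ∈ cs, c < g.headI.length) →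
      WFV g.length g.headI.length vis →
      WFV g.length g.headI.length
        (cs.foldl (fun vis c => if pvVal g r c = 2 then pvSetB vis r c else vis) vis) ∧
      (∀ p : Nat × Nat,
        pvGetB (cs.foldl (fun vis c => if pvVal g r c = 2 then pvSetB vis r c else vis) vis) p.1 p.2 = true ↔
          pvGetB vis p.1 p.2 = true ∨ (p.1 = r ∧ p.2 ∈ cs ∧ pvVal g r p.2 = 2)) := by
  intro cs
  induction cs with
  | nil => intro vis _ hWF; exact ⟨hWF, by simp⟩
  | cons c cs ihc =>
    intro vis hcs hWF
    rw [List.foldl_cons]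
    by_cases hv : pvVal g r c = 2
    · rw [if_pos hv]
      have hrl : r < vis.length := by rw [hWF.1]; exact hr
      have hcl : c < (vis.getD r []).length := by
        rw [List.getD_eq_getElem _ _ hrl, hWF.2 _ (List.getElem_mem hrl)]
        exact hcs c List.mem_cons_self
      obtain ⟨hWF', hiff⟩ := ihc (pvSetB vis r c) (fun x hx => hcs x (List.mem_cons_of_mem _ hx))
        (WFV_setB hWF _ _)
      refine ⟨hWF', ?_⟩
      intro p
      rw [hiff p]
      have hset : pvGetB (pvSetB vis r c) p.1 p.2 = true ↔
          pvGetB vis p.1 p.2 = true ∨ p = (r, c) := by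
        by_cases hx : p = (r, c)
        · rw [hx]
          constructor
          · intro _; exact Or.inr rfl
          · intro _; simpa using getB_setB_same hrl hcl
        · rw [getB_setB_other (by simpa [Prod.ext_iff] using hx)]
          simp [hx]
      rw [hset]
      constructor
      · rintro ((h | h) | h)
        · exact Or.inl h
        · subst h
          exact Or.inr ⟨rfl, List.mem_cons_self, hv⟩
        · exact Or.inr ⟨h.1, List.mem_cons_of_mem _ h.2.1, h.2.2⟩
      · rintro (h | ⟨h1, h2, h3⟩)
        · exact Or.inl (Or.inl h)
        · rcases List.mem_cons.1 h2 with rfl | h2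
          · exact Or.inl (Or.inr (by ext <;> simp [h1]))
          · exact Or.inr ⟨h1, h2, h3⟩
    · rw [if_neg hv]
      obtain ⟨hWF', hiff⟩ := ihc vis (fun x hx => hcs x (List.mem_cons_of_mem _ hx)) hWF
      refine ⟨hWF', ?_⟩
      intro p
      rw [hiff p]
      constructor
      · rintro (h | h)
        · exact Or.inl h
        · exact Or.inr ⟨h.1, List.mem_cons_of_mem _ h.2.1, h.2.2⟩
      · rintro (h | ⟨h1, h2, h3⟩)
        · exact Or.inl h
        · rcases List.mem_cons.1 h2 with rfl | h2
          · exact absurd h3 (h1 ▸ hv)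
          · exact Or.inr ⟨h1, h2, h3⟩

lemma markAll_spec (g : List (List Int)) :
    ∀ (rs : List Nat) (vis : List (List Bool)), (∀ r ∈ rs, r < g.length) →
      WFV g.length g.headI.length vis →
      WFV g.length g.headI.length
        (rs.foldl (fun vis r => (List.range g.headI.length).foldl
          (fun vis c => if pvVal g r c = 2 then pvSetB vis r c else vis) vis) vis) ∧
      (∀ p : Nat × Nat,
        pvGetB (rs.foldl (fun vis r => (List.range g.headI.length).foldl
          (fun vis c => if pvVal g r c = 2 then pvSetB vis r c else vis) vis) vis) p.1 p.2 = true ↔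
          pvGetB vis p.1 p.2 = true ∨ (p.1 ∈ rs ∧ p.2 < g.headI.length ∧ pvVal g p.1 p.2 = 2)) := by
  intro rs
  induction rs with
  | nil => intro vis _ hWF; exact ⟨hWF, by simp⟩
  | cons r rs ihr =>
    intro vis hrs hWF
    rw [List.foldl_cons]
    obtain ⟨hWF₁, hiff₁⟩ := markCols_spec g r (hrs r List.mem_cons_self) (List.range g.headI.length)
      vis (fun c hc => List.mem_range.1 hc) hWF
    obtain ⟨hWF', hiff'⟩ := ihr _ (fun x hx => hrs x (List.mem_cons_of_mem _ hx)) hWF₁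
    refine ⟨hWF', ?_⟩
    intro p
    rw [hiff' p, hiff₁ p]
    simp only [List.mem_range, List.mem_cons]
    constructor
    · rintro ((h | ⟨h1, h2, h3⟩) | ⟨h1, h2, h3⟩)
      · exact Or.inl h
      · exact Or.inr ⟨Or.inl h1, h2, by rw [h1]; exact h3⟩
      · exact Or.inr ⟨Or.inr h1, h2, h3⟩
    · rintro (h | ⟨h1 | h1, h2, h3⟩)
      · exact Or.inl (Or.inl h)
      · exact Or.inl (Or.inr ⟨h1, h2, by rw [← h1]; exact h3⟩)
      · exact Or.inr ⟨h1, h2, h3⟩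

-- the scan invariant
def ScanInv (g : List (List Int)) (st : List (List Bool) × List (List (Nat × Nat))) : Prop :=
  WFV g.length g.headI.length st.1 ∧
  (∀ p : Nat × Nat, p.1 < g.length → p.2 < g.headI.length → ¬ FreeP g p →
    pvGetB st.1 p.1 p.2 = true) ∧
  (∀ p : Nat × Nat, FreeP g p → (pvGetB st.1 p.1 p.2 = true ↔ ∃ reg ∈ st.2, p ∈ reg)) ∧
  (∀ reg ∈ st.2, reg.Nodup ∧ ∃ srep, FreeP g srep ∧ ∀ p : Nat × Nat, (p ∈ reg ↔ ReachP g srep p))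

lemma scanCols_spec (g : List (List Int)) (r : Nat) (hr : r < g.length) :
    ∀ (cs : List Nat) (st : List (List Bool) × List (List (Nat × Nat))),
      (∀ c ∈ cs, c < g.headI.length) → ScanInv g st →
      ScanInv g (cs.foldl (fun st c =>
        if pvGetB st.1 r c = false then
          (let p := pvBfs g.length g.headI.length r c st.1; (p.1, st.2 ++ [p.2]))
        else st) st) ∧
      (∀ p : Nat × Nat, p.1 < g.length → p.2 < g.headI.length → pvGetB st.1 p.1 p.2 = true →
        pvGetB (cs.foldl (fun st c =>
          if pvGetB st.1 r c = false then
            (let p := pvBfs g.length g.headI.length r c st.1; (p.1, st.2 ++ [p.2]))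
          else st) st).1 p.1 p.2 = true) ∧
      (∀ reg ∈ st.2, reg ∈ (cs.foldl (fun st c =>
          if pvGetB st.1 r c = false then
            (let p := pvBfs g.length g.headI.length r c st.1; (p.1, st.2 ++ [p.2]))
          else st) st).2) ∧
      (∀ c ∈ cs, pvGetB (cs.foldl (fun st c =>
        if pvGetB st.1 r c = false then
          (let p := pvBfs g.length g.headI.length r c st.1; (p.1, st.2 ++ [p.2]))
        else st) st).1 r c = true) := by
  intro cs
  induction cs with
  | nil => intro st _ hInv; exact ⟨hInv, fun p _ _ hp => hp, fun reg hreg => hreg, by simp⟩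
  | cons c cs ihc =>
    intro st hcs hInv
    obtain ⟨hWF, hpath, hfreeiff, hregs⟩ := hInv
    have hcC : c < g.headI.length := hcs c List.mem_cons_self
    rw [List.foldl_cons]
    by_cases hvis : pvGetB st.1 r c = false
    · rw [if_pos hvis]
      have hfree_rc : FreeP g (r, c) := by
        by_contra hnf
        rw [hpath (r, c) hr hcC hnf] at hvis
        exact absurd hvis (by simp)
      have hsep : ∀ p : Nat × Nat, FreeP g p → pvGetB st.1 p.1 p.2 = true →
          ¬ ReachP g (r, c) p := by
        intro p hpfree hpvis hreach
        obtain ⟨reg, hreg, hpreg⟩ := (hfreeiff p hpfree).1 hpvis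
        obtain ⟨hregnd, srep, hsfree, hregiff⟩ := hregs reg hreg
        have h1 : ReachP g srep p := (hregiff p).1 hpreg
        have h2 : ReachP g srep (r, c) :=
          Relation.ReflTransGen.trans h1 (reach_symm hreach)
        have h3 : (r, c) ∈ reg := (hregiff (r, c)).2 h2
        have h4 := (hfreeiff (r, c) hfree_rc).2 ⟨reg, hreg, h3⟩
        rw [h4] at hvis
        exact absurd hvis (by simp)
      obtain ⟨bWF, bnd, biff, bmem⟩ := pvBfs_spec g (r, c) st.1 hfree_rc
        (fun p hpa hpb hnf => hpath p hpa hpb hnf) hsep hWF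
      have hInv' : ScanInv g (let p := pvBfs g.length g.headI.length r c st.1;
          (p.1, st.2 ++ [p.2])) := by
        refine ⟨bWF, ?_, ?_, ?_⟩
        · intro p hpa hpb hnf
          exact (biff p hpa hpb).2 (Or.inl (hpath p hpa hpb hnf))
        · intro p hpfree
          rw [biff p hpfree.1.1 hpfree.1.2, hfreeiff p hpfree]
          simp only [List.mem_append, List.mem_singleton]
          constructor
          · rintro (⟨reg, h1, h2⟩ | h)
            · exact ⟨reg, Or.inl h1, h2⟩
            · exact ⟨_, Or.inr rfl, h⟩
          · rintro ⟨reg, h1 | h1, h2⟩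
            · exact Or.inl ⟨reg, h1, h2⟩
            · exact Or.inr (h1 ▸ h2)
        · intro reg hreg
          rcases List.mem_append.1 hreg with h | h
          · exact hregs reg h
          · rw [List.mem_singleton.1 h]
            exact ⟨bnd, (r, c), hfree_rc, bmem⟩
      obtain ⟨c1, c2, c3, c4⟩ := ihc _ (fun x hx => hcs x (List.mem_cons_of_mem _ hx)) hInv'
      refine ⟨c1, ?_, ?_, ?_⟩
      · intro p hpa hpb hp
        exact c2 p hpa hpb ((biff p hpa hpb).2 (Or.inl hp))
      · intro reg hreg
        exact c3 reg (List.mem_append.2 (Or.inl hreg))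
      · intro x hx
        rcases List.mem_cons.1 hx with rfl | hx
        · exact c2 (r, x) hr (hcs x List.mem_cons_self) ((biff (r, x) hr (hcs x List.mem_cons_self)).2
            (Or.inr ((bmem (r, x)).2 Relation.ReflTransGen.refl)))
        · exact c4 x hx
    · rw [if_neg hvis]
      have hvis' : pvGetB st.1 r c = true := by
        rcases Bool.eq_false_or_eq_true (pvGetB st.1 r c) with h | h
        · exact h
        · exact absurd h hvis
      obtain ⟨c1, c2, c3, c4⟩ := ihc st (fun x hx => hcs x (List.mem_cons_of_mem _ hx))
        ⟨hWF, hpath, hfreeiff, hregs⟩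
      refine ⟨c1, c2, c3, ?_⟩
      intro x hx
      rcases List.mem_cons.1 hx with rfl | hx
      · exact c2 (r, x) hr (hcs x List.mem_cons_self) hvis'
      · exact c4 x hx

lemma scanRows_spec (g : List (List Int)) :
    ∀ (rs : List Nat) (st : List (List Bool) × List (List (Nat × Nat))),
      (∀ r ∈ rs, r < g.length) → ScanInv g st →
      ScanInv g (rs.foldl (fun st r => (List.range g.headI.length).foldl (fun st c =>
          if pvGetB st.1 r c = false then
            (let p := pvBfs g.length g.headI.length r c st.1; (p.1, st.2 ++ [p.2]))
          else st) st) st) ∧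
      (∀ reg ∈ st.2, reg ∈ (rs.foldl (fun st r => (List.range g.headI.length).foldl (fun st c =>
          if pvGetB st.1 r c = false then
            (let p := pvBfs g.length g.headI.length r c st.1; (p.1, st.2 ++ [p.2]))
          else st) st) st).2) ∧
      (∀ p : Nat × Nat, p.1 ∈ rs → p.2 < g.headI.length →
        pvGetB (rs.foldl (fun st r => (List.range g.headI.length).foldl (fun st c =>
          if pvGetB st.1 r c = false then
            (let p := pvBfs g.length g.headI.length r c st.1; (p.1, st.2 ++ [p.2]))
          else st) st) st).1 p.1 p.2 = true) := by
  intro rs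
  induction rs with
  | nil => intro st _ hInv; exact ⟨hInv, fun reg hreg => hreg, by simp⟩
  | cons r rs ihr =>
    intro st hrs hInv
    rw [List.foldl_cons]
    have hrR : r < g.length := hrs r List.mem_cons_self
    obtain ⟨i1, i2, i3, i4⟩ := scanCols_spec g r hrR (List.range g.headI.length) st
      (fun c hc => List.mem_range.1 hc) hInv
    obtain ⟨c1, c2, c3⟩ := ihr _ (fun x hx => hrs x (List.mem_cons_of_mem _ hx)) i1
    -- mono through the remaining rows
    have hmono : ∀ (rs' : List Nat) (st' : List (List Bool) × List (List (Nat × Nat))),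
        ScanInv g st' → (∀ r' ∈ rs', r' < g.length) →
        ∀ p : Nat × Nat, p.1 < g.length → p.2 < g.headI.length →
          pvGetB st'.1 p.1 p.2 = true →
          pvGetB (rs'.foldl (fun st r => (List.range g.headI.length).foldl (fun st c =>
            if pvGetB st.1 r c = false then
              (let p := pvBfs g.length g.headI.length r c st.1; (p.1, st.2 ++ [p.2]))
            else st) st) st').1 p.1 p.2 = true := by
      intro rs'
      induction rs' with
      | nil => intro st' _ _ p _ _ hp; exact hp
      | cons r' rs' ihm =>
        intro st' hInv' hrs' p hpa hpb hp
        rw [List.foldl_cons]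
        obtain ⟨j1, j2, j3, j4⟩ := scanCols_spec g r' (hrs' r' List.mem_cons_self)
          (List.range g.headI.length) st' (fun c hc => List.mem_range.1 hc) hInv'
        exact ihm _ j1 (fun x hx => hrs' x (List.mem_cons_of_mem _ hx)) p hpa hpb
          (j2 p hpa hpb hp)
    refine ⟨c1, ?_, ?_⟩
    · intro reg hreg
      exact c2 reg (i3 reg hreg)
    · intro p hpr hpc
      rcases List.mem_cons.1 hpr with h | h
      · have hvis := i4 p.2 (List.mem_range.2 hpc)
        have : pvGetB ((List.range g.headI.length).foldl (fun st c =>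
            if pvGetB st.1 r c = false then
              (let p := pvBfs g.length g.headI.length r c st.1; (p.1, st.2 ++ [p.2]))
            else st) st).1 p.1 p.2 = true := by rw [h]; exact hvis
        exact hmono rs _ i1 (fun x hx => hrs x (List.mem_cons_of_mem _ hx)) p
          (by rw [h]; exact hrR) hpc this
      · exact c3 p h hpc

-- coloring folds (side A): value after assigning a colour to every cell of a region
lemma setI_out {res : List (List Int)} {q : Nat × Nat} {col : Int}
    (h : ¬(q.1 < res.length ∧ q.2 < (res.getD q.1 []).length)) :
    pvSetI res q.1 q.2 col = res := by
  unfold pvSetI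
  by_cases h1 : q.1 < res.length
  · have h2 : ¬ q.2 < (res.getD q.1 []).length := by tauto
    rw [List.set_eq_of_length_le (show (res.getD q.1 []).length ≤ q.2 by omega)]
    rw [List.getD_eq_getElem _ _ h1]
    exact List.set_getElem_self h1
  · exact List.set_eq_of_length_le (by omega)

lemma colorOne_spec (reg : List (Nat × Nat)) (col : Int) :
    ∀ (res : List (List Int)) (p : Nat × Nat),
      (pvVal (reg.foldl (fun res q => pvSetI res q.1 q.2 col) res) p.1 p.2 =
        if p ∈ reg ∧ p.1 < res.length ∧ p.2 < (res.getD p.1 []).length then col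
        else pvVal res p.1 p.2) ∧
      (reg.foldl (fun res q => pvSetI res q.1 q.2 col) res).length = res.length ∧
      (∀ i, ((reg.foldl (fun res q => pvSetI res q.1 q.2 col) res).getD i []).length =
        (res.getD i []).length) := by
  induction reg with
  | nil => intro res p; simp
  | cons q reg ihq =>
    intro res p
    rw [List.foldl_cons]
    obtain ⟨v1, v2, v3⟩ := ihq (pvSetI res q.1 q.2 col) p
    have hlen : (pvSetI res q.1 q.2 col).length = res.length := len_setI
    have hrlen : ∀ i, ((pvSetI res q.1 q.2 col).getD i []).length = (res.getD i []).length :=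
      fun i => rowlen_setI i
    refine ⟨?_, by rw [v2, hlen], fun i => by rw [v3 i, hrlen i]⟩
    rw [v1, hlen, hrlen]
    by_cases hq_in : q.1 < res.length ∧ q.2 < (res.getD q.1 []).length
    · by_cases hmem : p ∈ reg
      · by_cases hin : p.1 < res.length ∧ p.2 < (res.getD p.1 []).length
        · rw [if_pos ⟨hmem, hin⟩, if_pos ⟨List.mem_cons_of_mem _ hmem, hin⟩]
        · rw [if_neg (by tauto), if_neg (by tauto)]
          have hne : p ≠ q := by rintro rfl; exact hin hq_in
          exact val_setI_other (by simpa [Prod.ext_iff] using hne)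
      · rw [if_neg (by tauto)]
        by_cases hpq : p = q
        · subst hpq
          rw [if_pos ⟨List.mem_cons_self, hq_in⟩]
          exact val_setI_same hq_in.1 hq_in.2
        · rw [if_neg (fun hcon => (List.mem_cons.1 hcon.1).elim (fun h => hpq h) (fun h => hmem h))]
          exact val_setI_other (by simpa [Prod.ext_iff] using hpq)
    · rw [setI_out hq_in]
      by_cases hin : p.1 < res.length ∧ p.2 < (res.getD p.1 []).length
      · have hne : p ≠ q := by rintro rfl; exact hq_in hin
        by_cases hmem : p ∈ reg
        · rw [if_pos ⟨hmem, hin⟩, if_pos ⟨List.mem_cons_of_mem _ hmem, hin⟩]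
        · rw [if_neg (by tauto),
            if_neg (fun hcon => (List.mem_cons.1 hcon.1).elim (fun h => hne h) (fun h => hmem h))]
      · rw [if_neg (by tauto), if_neg (by tauto)]

lemma colorAll_spec (ml : Nat) :
    ∀ (regs : List (List (Nat × Nat))) (res : List (List Int)),
      ((regs.foldl (fun res region =>
          region.foldl (fun res q => pvSetI res q.1 q.2
            (if region.length = ml then (3:Int) else 5)) res) res).length = res.length) ∧
      (∀ i, ((regs.foldl (fun res region =>
          region.foldl (fun res q => pvSetI res q.1 q.2
            (if region.length = ml then (3:Int) else 5)) res) res).getD i []).length =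
        (res.getD i []).length) ∧
      (∀ p : Nat × Nat, (∀ reg ∈ regs, p ∉ reg) →
        pvVal (regs.foldl (fun res region =>
          region.foldl (fun res q => pvSetI res q.1 q.2
            (if region.length = ml then (3:Int) else 5)) res) res) p.1 p.2 = pvVal res p.1 p.2) ∧
      (∀ p : Nat × Nat, ∀ col : Int,
        (∀ reg ∈ regs, p ∈ reg → (if reg.length = ml then (3:Int) else 5) = col) →
        (∃ reg ∈ regs, p ∈ reg) → p.1 < res.length → p.2 < (res.getD p.1 []).length →
        pvVal (regs.foldl (fun res region =>
          region.foldl (fun res q => pvSetI res q.1 q.2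
            (if region.length = ml then (3:Int) else 5)) res) res) p.1 p.2 = col) := by
  intro regs
  induction regs with
  | nil =>
    intro res
    refine ⟨rfl, fun i => rfl, fun p _ => rfl, ?_⟩
    rintro p col _ ⟨reg, hreg, _⟩ _ _
    exact absurd hreg (by simp)
  | cons reg regs ihr =>
    intro res
    rw [List.foldl_cons]
    obtain ⟨w1, w2, w3, w4⟩ := ihr (reg.foldl (fun res q => pvSetI res q.1 q.2
      (if reg.length = ml then (3:Int) else 5)) res)
    have o1 := fun (p : Nat × Nat) => (colorOne_spec reg (if reg.length = ml then (3:Int) else 5) res p).1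
    have o2 := (colorOne_spec reg (if reg.length = ml then (3:Int) else 5) res (0,0)).2.1
    have o3 := (colorOne_spec reg (if reg.length = ml then (3:Int) else 5) res (0,0)).2.2
    refine ⟨by rw [w1, o2], fun i => by rw [w2 i, o3 i], ?_, ?_⟩
    · intro p hp
      rw [w3 p (fun r hr => hp r (List.mem_cons_of_mem _ hr)), o1 p,
        if_neg (fun hcon => hp reg List.mem_cons_self hcon.1)]
    · intro p col hcol hex hpa hpb
      by_cases hlater : ∃ r ∈ regs, p ∈ r
      · exact w4 p col (fun r hr hpr => hcol r (List.mem_cons_of_mem _ hr) hpr) hlater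
          (by rw [o2]; exact hpa) (by rw [o3]; exact hpb)
      · have hmem : p ∈ reg := by
          rcases hex with ⟨r, hr, hpr⟩
          rcases List.mem_cons.1 hr with rfl | hr
          · exact hpr
          · exact absurd ⟨r, hr, hpr⟩ hlater
        have hnone : ∀ r ∈ regs, p ∉ r := by
          intro r hr hpr
          exact hlater ⟨r, hr, hpr⟩
        rw [w3 p hnone, o1 p, if_pos ⟨hmem, hpa, hpb⟩]
        exact hcol reg List.mem_cons_self hmem

-- ===== B side: flat indices =====
lemma enc_lt {R C i : Nat} (hi : i < R * C) : i / C < R ∧ i % C < C := by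
  have hC : 0 < C := by
    rcases Nat.eq_zero_or_pos C with rfl | h
    · omega
    · exact h
  exact ⟨(Nat.div_lt_iff_lt_mul hC).2 (by omega), Nat.mod_lt _ hC⟩

lemma idx_enc {C i : Nat} (_hC : 0 < C) : (i / C) * C + i % C = i := by
  rw [Nat.mul_comm]
  exact Nat.div_add_mod i C

lemma enc_idx {C r c : Nat} (hc : c < C) : (r * C + c) / C = r ∧ (r * C + c) % C = c := by
  constructor
  · rw [mul_comm r C, Nat.mul_add_div (by omega), Nat.div_eq_of_lt hc]
    omega
  · rw [mul_comm r C, Nat.mul_add_mod, Nat.mod_eq_of_lt hc]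

lemma idx_lt {R C r c : Nat} (hr : r < R) (hc : c < C) : r * C + c < R * C := by
  calc r * C + c < r * C + C := by omega
    _ = (r + 1) * C := by ring
    _ ≤ R * C := Nat.mul_le_mul_right _ (by omega)

-- the free list
lemma freeL_getD (g : List (List Int)) {i : Nat} (hi : i < g.length * g.headI.length) :
    ((List.range (g.length * g.headI.length)).map
      (fun i => decide (pvVal g (i / g.headI.length) (i % g.headI.length) ≠ 2))).getD i false =
    decide (pvVal g (i / g.headI.length) (i % g.headI.length) ≠ 2) := by
  rw [List.getD_eq_getElem?_getD, List.getElem?_map, List.getElem?_range hi]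
  simp

lemma freeL_iff (g : List (List Int)) {i : Nat} (hi : i < g.length * g.headI.length) :
    (((List.range (g.length * g.headI.length)).map
      (fun i => decide (pvVal g (i / g.headI.length) (i % g.headI.length) ≠ 2))).getD i false = true ↔
    FreeP g (i / g.headI.length, i % g.headI.length)) := by
  rw [freeL_getD g hi]
  have hb := enc_lt hi
  simp only [decide_eq_true_eq]
  constructor
  · intro h; exact ⟨⟨hb.1, hb.2⟩, h⟩
  · intro h; exact h.2

-- generic facts about the min-fold in pvStep
lemma minFold_le (R C : Nat) (free : List Bool) (lab : List Nat) :
    ∀ (l : List (Int × Int)) (v0 : Nat),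
      l.foldl (fun v nb =>
        if 0 ≤ nb.1 ∧ nb.1 < (R:Int) ∧ 0 ≤ nb.2 ∧ nb.2 < (C:Int) ∧
            free.getD (nb.1.toNat * C + nb.2.toNat) false = true
        then min v (lab.getD (nb.1.toNat * C + nb.2.toNat) 0) else v) v0 ≤ v0 := by
  intro l
  induction l with
  | nil => intro v0; simp
  | cons a l ihl =>
    intro v0
    rw [List.foldl_cons]
    split_ifs with h
    · exact le_trans (ihl _) (min_le_left _ _)
    · exact ihl v0

lemma minFold_cases (R C : Nat) (free : List Bool) (lab : List Nat) :
    ∀ (l : List (Int × Int)) (v0 : Nat),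
      l.foldl (fun v nb =>
        if 0 ≤ nb.1 ∧ nb.1 < (R:Int) ∧ 0 ≤ nb.2 ∧ nb.2 < (C:Int) ∧
            free.getD (nb.1.toNat * C + nb.2.toNat) false = true
        then min v (lab.getD (nb.1.toNat * C + nb.2.toNat) 0) else v) v0 = v0 ∨
      ∃ nb ∈ l, (0 ≤ nb.1 ∧ nb.1 < (R:Int) ∧ 0 ≤ nb.2 ∧ nb.2 < (C:Int) ∧
          free.getD (nb.1.toNat * C + nb.2.toNat) false = true) ∧
        l.foldl (fun v nb =>
          if 0 ≤ nb.1 ∧ nb.1 < (R:Int) ∧ 0 ≤ nb.2 ∧ nb.2 < (C:Int) ∧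
              free.getD (nb.1.toNat * C + nb.2.toNat) false = true
          then min v (lab.getD (nb.1.toNat * C + nb.2.toNat) 0) else v) v0 =
          lab.getD (nb.1.toNat * C + nb.2.toNat) 0 := by
  intro l
  induction l with
  | nil => intro v0; exact Or.inl rfl
  | cons a l ihl =>
    intro v0
    rw [List.foldl_cons]
    split_ifs with h
    · rcases ihl (min v0 (lab.getD (a.1.toNat * C + a.2.toNat) 0)) with h1 | ⟨nb, hnb, hc, he⟩
      · rcases min_cases v0 (lab.getD (a.1.toNat * C + a.2.toNat) 0) with ⟨hm, _⟩ | ⟨hm, _⟩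
        · exact Or.inl (by rw [h1, hm])
        · exact Or.inr ⟨a, List.mem_cons_self, h, by rw [h1, hm]⟩
      · exact Or.inr ⟨nb, List.mem_cons_of_mem _ hnb, hc, he⟩
    · rcases ihl v0 with h1 | ⟨nb, hnb, hc, he⟩
      · exact Or.inl h1
      · exact Or.inr ⟨nb, List.mem_cons_of_mem _ hnb, hc, he⟩

lemma minFold_le_elem (R C : Nat) (free : List Bool) (lab : List Nat) :
    ∀ (l : List (Int × Int)) (v0 : Nat) (nb : Int × Int), nb ∈ l →
      (0 ≤ nb.1 ∧ nb.1 < (R:Int) ∧ 0 ≤ nb.2 ∧ nb.2 < (C:Int) ∧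
        free.getD (nb.1.toNat * C + nb.2.toNat) false = true) →
      l.foldl (fun v nb =>
        if 0 ≤ nb.1 ∧ nb.1 < (R:Int) ∧ 0 ≤ nb.2 ∧ nb.2 < (C:Int) ∧
            free.getD (nb.1.toNat * C + nb.2.toNat) false = true
        then min v (lab.getD (nb.1.toNat * C + nb.2.toNat) 0) else v) v0 ≤
        lab.getD (nb.1.toNat * C + nb.2.toNat) 0 := by
  intro l
  induction l with
  | nil => intro v0 nb h; simp at h
  | cons a l ihl =>
    intro v0 nb hmem hcond
    rw [List.foldl_cons]
    rcases List.mem_cons.1 hmem with rfl | hmem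
    · rw [if_pos hcond]
      exact le_trans (minFold_le R C free lab l _) (min_le_right _ _)
    · split_ifs with h
      · exact ihl _ nb hmem hcond
      · exact ihl _ nb hmem hcond

lemma step_len {R C : Nat} {free : List Bool} {lab : List Nat} :
    (pvStep R C free lab).length = R * C := by
  simp [pvStep]

lemma step_getD {R C : Nat} {free : List Bool} {lab : List Nat} {i : Nat} (hi : i < R * C) :
    (pvStep R C free lab).getD i 0 =
      if free.getD i false = true then
        (pvNbrs (i / C) (i % C)).foldl (fun v nb =>
          if 0 ≤ nb.1 ∧ nb.1 < (R:Int) ∧ 0 ≤ nb.2 ∧ nb.2 < (C:Int) ∧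
              free.getD (nb.1.toNat * C + nb.2.toNat) false = true
          then min v (lab.getD (nb.1.toNat * C + nb.2.toNat) 0) else v) (lab.getD i 0)
      else lab.getD i 0 := by
  unfold pvStep
  rw [List.getD_eq_getElem?_getD, List.getElem?_map, List.getElem?_range hi]
  simp only [Option.map_some, Option.getD_some]

def FreeL (g : List (List Int)) : List Bool :=
  (List.range (g.length * g.headI.length)).map
    (fun i => decide (pvVal g (i / g.headI.length) (i % g.headI.length) ≠ 2))

def EncP (g : List (List Int)) (i : Nat) : Nat × Nat := (i / g.headI.length, i % g.headI.length)
def IdxP (g : List (List Int)) (p : Nat × Nat) : Nat := p.1 * g.headI.length + p.2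

lemma freeL_iff' (g : List (List Int)) {i : Nat} (hi : i < g.length * g.headI.length) :
    ((FreeL g).getD i false = true ↔ FreeP g (EncP g i)) := freeL_iff g hi

lemma encp_idxp (g : List (List Int)) {p : Nat × Nat} (hc : p.2 < g.headI.length) :
    EncP g (IdxP g p) = p := by
  unfold EncP IdxP
  rw [(enc_idx hc).1, (enc_idx hc).2]

lemma idxp_lt (g : List (List Int)) {p : Nat × Nat} (hfree : FreeP g p) :
    IdxP g p < g.length * g.headI.length := idx_lt hfree.1.1 hfree.1.2

lemma free_idxp (g : List (List Int)) {p : Nat × Nat} (hfree : FreeP g p) :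
    (FreeL g).getD (IdxP g p) false = true := by
  rw [freeL_iff' g (idxp_lt g hfree), encp_idxp g hfree.1.2]
  exact hfree

def GoodLab (g : List (List Int)) (lab : List Nat) : Prop :=
  lab.length = g.length * g.headI.length ∧
  ∀ i, i < g.length * g.headI.length →
    (FreeP g (EncP g i) → FreeP g (EncP g (lab.getD i 0)) ∧
      ReachP g (EncP g i) (EncP g (lab.getD i 0)) ∧ lab.getD i 0 ≤ i) ∧
    (¬ FreeP g (EncP g i) → lab.getD i 0 = i)

lemma cand_adj (g : List (List Int)) {i : Nat} (_hi : i < g.length * g.headI.length)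
    (hfree_i : FreeP g (EncP g i)) {nb : Int × Int}
    (hnb : nb ∈ pvNbrs (i / g.headI.length) (i % g.headI.length))
    (hcond : 0 ≤ nb.1 ∧ nb.1 < (g.length : Int) ∧ 0 ≤ nb.2 ∧ nb.2 < (g.headI.length : Int) ∧
      (FreeL g).getD (nb.1.toNat * g.headI.length + nb.2.toNat) false = true) :
    nb.1.toNat * g.headI.length + nb.2.toNat < g.length * g.headI.length ∧
    AdjP g (EncP g i) (EncP g (nb.1.toNat * g.headI.length + nb.2.toNat)) := by
  obtain ⟨h1, h2, h3, h4, h5⟩ := hcond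
  obtain ⟨ha, hb, htouch⟩ := mem_pvNbrs_spec hnb h1 h2 h3 h4
  have hj : nb.1.toNat * g.headI.length + nb.2.toNat < g.length * g.headI.length := idx_lt ha hb
  have hencj : EncP g (nb.1.toNat * g.headI.length + nb.2.toNat) = (nb.1.toNat, nb.2.toNat) := by
    unfold EncP
    rw [(enc_idx hb).1, (enc_idx hb).2]
  have hfree_j : FreeP g (EncP g (nb.1.toNat * g.headI.length + nb.2.toNat)) := by
    rw [← freeL_iff' g hj]
    exact h5
  refine ⟨hj, hfree_i, hfree_j, ?_⟩
  rw [hencj]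
  exact htouch

lemma step_good (g : List (List Int)) {lab : List Nat} (hgood : GoodLab g lab) :
    GoodLab g (pvStep g.length g.headI.length (FreeL g) lab) := by
  refine ⟨step_len, ?_⟩
  intro i hi
  constructor
  · intro hfree
    have hgets := step_getD (R := g.length) (C := g.headI.length)
      (free := FreeL g) (lab := lab) hi
    rw [if_pos ((freeL_iff' g hi).2 hfree)] at hgets
    have hle : (pvStep g.length g.headI.length (FreeL g) lab).getD i 0 ≤ lab.getD i 0 := by
      rw [hgets]; exact minFold_le _ _ _ _ _ _
    rcases minFold_cases g.length g.headI.length (FreeL g) lab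
        (pvNbrs (i / g.headI.length) (i % g.headI.length)) (lab.getD i 0) with hcase | ⟨nb, hnb, hcond, heq⟩
    · rw [hgets, hcase]
      obtain ⟨f1, f2, f3⟩ := (hgood.2 i hi).1 hfree
      exact ⟨f1, f2, by omega⟩
    · obtain ⟨hj, hadj⟩ := cand_adj g hi hfree hnb hcond
      obtain ⟨f1, f2, _⟩ := (hgood.2 _ hj).1 hadj.2.1
      rw [hgets, heq]
      refine ⟨f1, ?_, ?_⟩
      · exact Relation.ReflTransGen.trans (Relation.ReflTransGen.single hadj) f2
      · have := (hgood.2 i hi).1 hfree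
        have h2 := minFold_le g.length g.headI.length (FreeL g) lab
          (pvNbrs (i / g.headI.length) (i % g.headI.length)) (lab.getD i 0)
        rw [heq] at h2
        omega
  · intro hnfree
    have hgets := step_getD (R := g.length) (C := g.headI.length)
      (free := FreeL g) (lab := lab) hi
    rw [if_neg (by rw [freeL_iff' g hi]; exact hnfree)] at hgets
    rw [hgets]
    exact (hgood.2 i hi).2 hnfree

lemma step_le_all (g : List (List Int)) {lab : List Nat} (_hlen : lab.length = g.length * g.headI.length) :
    ∀ i, i < g.length * g.headI.length →
      (pvStep g.length g.headI.length (FreeL g) lab).getD i 0 ≤ lab.getD i 0 := by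
  intro i hi
  have hgets := step_getD (R := g.length) (C := g.headI.length) (free := FreeL g) (lab := lab) hi
  rw [hgets]
  split_ifs with h
  · exact minFold_le _ _ _ _ _ _
  · exact le_refl _

lemma sum_le_pointwise : ∀ l1 l2 : List Nat, l1.length = l2.length →
    (∀ i, i < l1.length → l1.getD i 0 ≤ l2.getD i 0) → l1.sum ≤ l2.sum := by
  intro l1
  induction l1 with
  | nil => intro l2 _ _; simp
  | cons a l1 ih =>
    intro l2 hlen hle
    match l2 with
    | [] => simp at hlen
    | b :: l2 =>
      have h0 : a ≤ b := hle 0 (by simp)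
      have ht : l1.sum ≤ l2.sum := by
        refine ih l2 (by simpa using hlen) ?_
        intro i hi
        have := hle (i+1) (by simp; omega)
        simpa using this
      simp only [List.sum_cons]
      omega

lemma sum_lt_pointwise : ∀ l1 l2 : List Nat, l1.length = l2.length →
    (∀ i, i < l1.length → l1.getD i 0 ≤ l2.getD i 0) → l1 ≠ l2 → l1.sum < l2.sum := by
  intro l1
  induction l1 with
  | nil =>
    intro l2 hlen _ hne
    have h2 : l2 = [] := List.eq_nil_of_length_eq_zero (by simpa using hlen.symm)
    subst h2
    exact absurd rfl hne
  | cons a l1 ih =>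
    intro l2 hlen hle hne
    match l2 with
    | [] => simp at hlen
    | b :: l2 =>
      have h0 : a ≤ b := hle 0 (by simp)
      have htle : ∀ i, i < l1.length → l1.getD i 0 ≤ l2.getD i 0 := by
        intro i hi
        have := hle (i+1) (by simp; omega)
        simpa using this
      by_cases hab : a = b
      · have htne : l1 ≠ l2 := by
          intro hcon
          exact hne (by rw [hab, hcon])
        have := ih l2 (by simpa using hlen) htle htne
        simp only [List.sum_cons]
        omega
      · have := sum_le_pointwise l1 l2 (by simpa using hlen) htle
        simp only [List.sum_cons]
        omega

lemma fixLoop_spec (g : List (List Int)) :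
    ∀ (fuel : Nat) (lab : List Nat), GoodLab g lab → lab.sum < fuel →
      GoodLab g (pvFixLoop g.length g.headI.length (FreeL g) fuel lab) ∧
      pvStep g.length g.headI.length (FreeL g)
        (pvFixLoop g.length g.headI.length (FreeL g) fuel lab) =
        pvFixLoop g.length g.headI.length (FreeL g) fuel lab := by
  intro fuel
  induction fuel with
  | zero => intro lab _ h; omega
  | succ fuel ih =>
    intro lab hgood hsum
    have hunf : pvFixLoop g.length g.headI.length (FreeL g) (fuel+1) lab =
        if pvStep g.length g.headI.length (FreeL g) lab = lab then lab
        else pvFixLoop g.length g.headI.length (FreeL g) fuel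
          (pvStep g.length g.headI.length (FreeL g) lab) := rfl
    rw [hunf]
    split_ifs with hfix
    · exact ⟨hgood, hfix⟩
    · have hgood' := step_good g hgood
      have hlt : (pvStep g.length g.headI.length (FreeL g) lab).sum < lab.sum := by
        refine sum_lt_pointwise _ _ (by rw [step_len, hgood.1]) ?_ hfix
        intro i hi
        exact step_le_all g hgood.1 i (by rw [step_len] at hi; exact hi)
      exact ih _ hgood' (by omega)

-- at a fixpoint, labels are constant on components and separate them
lemma fix_adj_le (g : List (List Int)) {L : List Nat}
    (hfix : pvStep g.length g.headI.length (FreeL g) L = L)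
    {p q : Nat × Nat} (hadj : AdjP g p q) :
    L.getD (IdxP g p) 0 ≤ L.getD (IdxP g q) 0 := by
  have hfp := hadj.1
  have hfq := hadj.2.1
  have hip : IdxP g p < g.length * g.headI.length := idxp_lt g hfp
  have hiq : IdxP g q < g.length * g.headI.length := idxp_lt g hfq
  have hgets := step_getD (R := g.length) (C := g.headI.length) (free := FreeL g) (lab := L) hip
  rw [hfix] at hgets
  rw [if_pos (by rw [freeL_iff' g hip, encp_idxp g hfp.1.2]; exact hfp)] at hgets
  have hpe1 : IdxP g p / g.headI.length = p.1 := (enc_idx hfp.1.2).1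
  have hpe2 : IdxP g p % g.headI.length = p.2 := (enc_idx hfp.1.2).2
  rw [hpe1, hpe2] at hgets
  obtain ⟨nb, hnb, hnb1, hnb2, hte1, hte2⟩ := touch_mem_pvNbrs (p := q)
    (by
      have : TouchP p q := hadj.2.2
      rw [show ((p.1 : Nat), (p.2 : Nat)) = p from rfl]
      exact this)
  have hcond : 0 ≤ nb.1 ∧ nb.1 < (g.length : Int) ∧ 0 ≤ nb.2 ∧ nb.2 < (g.headI.length : Int) ∧
      (FreeL g).getD (nb.1.toNat * g.headI.length + nb.2.toNat) false = true := by
    refine ⟨hnb1, by have := hfq.1.1; omega, hnb2, by have := hfq.1.2; omega, ?_⟩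
    have : nb.1.toNat * g.headI.length + nb.2.toNat = IdxP g q := by
      unfold IdxP; rw [hte1, hte2]
    rw [this]
    exact free_idxp g hfq
  have hle := minFold_le_elem g.length g.headI.length (FreeL g) L
    (pvNbrs p.1 p.2) (L.getD (IdxP g p) 0) nb hnb hcond
  have : nb.1.toNat * g.headI.length + nb.2.toNat = IdxP g q := by
    unfold IdxP; rw [hte1, hte2]
  rw [this] at hle
  rw [hgets]
  exact hle

lemma fix_reach_eq (g : List (List Int)) {L : List Nat}
    (hfix : pvStep g.length g.headI.length (FreeL g) L = L)
    {p q : Nat × Nat} (hreach : ReachP g p q) :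
    L.getD (IdxP g p) 0 = L.getD (IdxP g q) 0 := by
  induction hreach with
  | refl => rfl
  | tail hstep hadj ihr =>
    rw [ihr]
    exact le_antisymm (fix_adj_le g hfix hadj) (fix_adj_le g hfix (adj_symm hadj))

lemma label_iff (g : List (List Int)) {L : List Nat} (hgood : GoodLab g L)
    (hfix : pvStep g.length g.headI.length (FreeL g) L = L)
    {p q : Nat × Nat} (hfp : FreeP g p) (hfq : FreeP g q) :
    (L.getD (IdxP g p) 0 = L.getD (IdxP g q) 0 ↔ ReachP g p q) := by
  constructor
  · intro heq
    have hip := idxp_lt g hfp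
    have hiq := idxp_lt g hfq
    have hp := (hgood.2 _ hip).1 (by rw [encp_idxp g hfp.1.2]; exact hfp)
    have hq := (hgood.2 _ hiq).1 (by rw [encp_idxp g hfq.1.2]; exact hfq)
    rw [encp_idxp g hfp.1.2] at hp
    rw [encp_idxp g hfq.1.2] at hq
    have h1 : ReachP g p (EncP g (L.getD (IdxP g p) 0)) := hp.2.1
    have h2 : ReachP g q (EncP g (L.getD (IdxP g q) 0)) := hq.2.1
    rw [← heq] at h2
    exact Relation.ReflTransGen.trans h1 (reach_symm h2)
  · exact fix_reach_eq g hfix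

def LabF (g : List (List Int)) : List Nat :=
  pvFixLoop g.length g.headI.length (FreeL g)
    ((g.length * g.headI.length) * (g.length * g.headI.length) + 1)
    (List.range (g.length * g.headI.length))

def KeysL (g : List (List Int)) : List Nat :=
  ((List.range (g.length * g.headI.length)).filter
    (fun i => (FreeL g).getD i false)).map (fun i => (LabF g).getD i 0)

def CntD (g : List (List Int)) : PySem.Dict Nat Nat :=
  (List.range (g.length * g.headI.length)).foldl
    (fun cnt i => if (FreeL g).getD i false then cnt.modify ((LabF g).getD i 0) 0 (· + 1) else cnt)
    PySem.Dict.empty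

def SzF (g : List (List Int)) (p : Nat × Nat) : Nat :=
  (CntD g).getD ((LabF g).getD (IdxP g p) 0) 0

lemma range_getD {n i : Nat} (hi : i < n) : (List.range n).getD i 0 = i := by
  rw [List.getD_eq_getElem?_getD, List.getElem?_range hi]
  rfl

lemma init_good (g : List (List Int)) : GoodLab g (List.range (g.length * g.headI.length)) := by
  refine ⟨by simp, ?_⟩
  intro i hi
  rw [range_getD hi]
  exact ⟨fun hf => ⟨hf, Relation.ReflTransGen.refl, le_refl _⟩, fun _ => rfl⟩

lemma labF_spec (g : List (List Int)) :
    GoodLab g (LabF g) ∧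
    pvStep g.length g.headI.length (FreeL g) (LabF g) = LabF g := by
  have hsum : (List.range (g.length * g.headI.length)).sum <
      (g.length * g.headI.length) * (g.length * g.headI.length) + 1 := by
    have := List.sum_le_card_nsmul (List.range (g.length * g.headI.length))
      (g.length * g.headI.length) (fun x hx => le_of_lt (List.mem_range.1 hx))
    simp only [List.length_range, smul_eq_mul] at this
    omega
  exact fixLoop_spec g _ _ (init_good g) hsum

lemma cntD_eq (g : List (List Int)) :
    CntD g = (KeysL g).foldl (fun d x => d.modify x 0 (· + 1)) PySem.Dict.empty := by
  unfold CntD KeysL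
  rw [List.foldl_map, List.foldl_filter]

lemma cntD_getD (g : List (List Int)) (k : Nat) :
    (CntD g).getD k 0 = (KeysL g).count k := by
  rw [cntD_eq g, PySem.Dict.getD_foldl_modify_add_one_nat]
  simp [PySem.Dict.getD_empty]

lemma cntD_keys (g : List (List Int)) : (CntD g).keys = PySem.Set.ofList (KeysL g) := by
  rw [cntD_eq g, PySem.Dict.keys_foldl_modify, PySem.Dict.keys_empty,
    PySem.Set.update_nil_left]

lemma cntD_keys_nodup (g : List (List Int)) : (CntD g).keys.Nodup := by
  rw [cntD_keys g]
  exact PySem.Set.nodup_ofList _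

lemma idxp_inj (g : List (List Int)) {p q : Nat × Nat} (hp : p.2 < g.headI.length)
    (hq : q.2 < g.headI.length) (h : IdxP g p = IdxP g q) : p = q := by
  have h1 := encp_idxp g hp
  have h2 := encp_idxp g hq
  rw [← h1, ← h2, h]

lemma mem_keysL (g : List (List Int)) (k : Nat) :
    k ∈ KeysL g ↔ ∃ i, i < g.length * g.headI.length ∧
      (FreeL g).getD i false = true ∧ (LabF g).getD i 0 = k := by
  unfold KeysL
  simp only [List.mem_map, List.mem_filter, List.mem_range]
  constructor
  · rintro ⟨i, ⟨h1, h2⟩, h3⟩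
    exact ⟨i, h1, h2, h3⟩
  · rintro ⟨i, h1, h2, h3⟩
    exact ⟨i, ⟨h1, h2⟩, h3⟩

lemma szF_count (g : List (List Int)) (p : Nat × Nat) :
    SzF g p = ((List.range (g.length * g.headI.length)).filter
      (fun i => (FreeL g).getD i false)).countP
        (fun i => (LabF g).getD i 0 == (LabF g).getD (IdxP g p) 0) := by
  unfold SzF
  rw [cntD_getD g, List.count_eq_countP]
  unfold KeysL
  rw [List.countP_map]
  rfl

lemma region_length (g : List (List Int)) {reg : List (Nat × Nat)} {srep p : Nat × Nat}
    (hreg : ∀ x : Nat × Nat, x ∈ reg ↔ ReachP g srep x) (hnd : reg.Nodup)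
    (hsfree : FreeP g srep) (hp : p ∈ reg) : reg.length = SzF g p := by
  obtain ⟨hgood, hfix⟩ := labF_spec g
  have hpfree : FreeP g p := reach_free ((hreg p).1 hp) hsfree
  have hreach_sp : ReachP g srep p := (hreg p).1 hp
  rw [szF_count g p, List.countP_eq_length_filter, List.filter_filter]
  set flt := ((List.range (g.length * g.headI.length)).filter
    (fun i => ((LabF g).getD i 0 == (LabF g).getD (IdxP g p) 0) && (FreeL g).getD i false))
    with hflt
  have hmapnd : (reg.map (IdxP g)).Nodup := by
    refine List.Nodup.map_on ?_ hnd
    intro x hx y hy hxy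
    exact idxp_inj g (reach_free ((hreg x).1 hx) hsfree).1.2
      (reach_free ((hreg y).1 hy) hsfree).1.2 hxy
  have hfltnd : flt.Nodup := List.Nodup.filter _ (List.nodup_range)
  have hmem : ∀ j, j ∈ reg.map (IdxP g) ↔ j ∈ flt := by
    intro j
    rw [hflt]
    simp only [List.mem_map, List.mem_filter, List.mem_range, Bool.and_eq_true, beq_iff_eq]
    constructor
    · rintro ⟨x, hx, rfl⟩
      have hxfree : FreeP g x := reach_free ((hreg x).1 hx) hsfree
      have hxp : ReachP g x p :=
        Relation.ReflTransGen.trans (reach_symm ((hreg x).1 hx)) hreach_sp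
      exact ⟨idxp_lt g hxfree, fix_reach_eq g hfix hxp, free_idxp g hxfree⟩
    · rintro ⟨h1, h3, h2⟩
      have hC : 0 < g.headI.length := by
        rcases Nat.eq_zero_or_pos g.headI.length with hz | h
        · rw [hz] at h1; omega
        · exact h
      have hxfree : FreeP g (EncP g j) := (freeL_iff' g h1).1 h2
      have hidx : IdxP g (EncP g j) = j := idx_enc hC
      have hlab : (LabF g).getD (IdxP g (EncP g j)) 0 = (LabF g).getD (IdxP g p) 0 := by
        rw [hidx]; exact h3
      have hreach : ReachP g (EncP g j) p := (label_iff g hgood hfix hxfree hpfree).1 hlab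
      refine ⟨EncP g j, ?_, hidx⟩
      rw [hreg]
      exact Relation.ReflTransGen.trans hreach_sp (reach_symm hreach)
  have hperm : (reg.map (IdxP g)).Perm flt := (List.perm_ext_iff_of_nodup hmapnd hfltnd).2 hmem
  calc reg.length = (reg.map (IdxP g)).length := by simp
    _ = flt.length := hperm.length_eq

lemma bfold_shapes (g : List (List Int)) (m : Nat) :
    ∀ (is : List Nat) (res : List (List Int)),
      ((is.foldl (fun res i => if (FreeL g).getD i false = true then
          pvSetI res (i / g.headI.length) (i % g.headI.length)
            (if (CntD g).getD ((LabF g).getD i 0) 0 = m then 3 else 5) else res) res).length =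
        res.length) ∧
      (∀ j, ((is.foldl (fun res i => if (FreeL g).getD i false = true then
          pvSetI res (i / g.headI.length) (i % g.headI.length)
            (if (CntD g).getD ((LabF g).getD i 0) 0 = m then 3 else 5) else res) res).getD j []).length =
        (res.getD j []).length) := by
  intro is
  induction is with
  | nil => intro res; exact ⟨rfl, fun j => rfl⟩
  | cons i is ih =>
    intro res
    rw [List.foldl_cons]
    by_cases h : (FreeL g).getD i false = true
    · rw [if_pos h]
      obtain ⟨h1, h2⟩ := ih (pvSetI res (i / g.headI.length) (i % g.headI.length)
        (if (CntD g).getD ((LabF g).getD i 0) 0 = m then 3 else 5))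
      exact ⟨by rw [h1, len_setI], fun j => by rw [h2 j, rowlen_setI j]⟩
    · rw [if_neg h]
      exact ih res

lemma bfold_untouched (g : List (List Int)) (m : Nat) :
    ∀ (is : List Nat) (res : List (List Int)) (p : Nat × Nat),
      (∀ i ∈ is, (FreeL g).getD i false = true → (i / g.headI.length, i % g.headI.length) ≠ p) →
      pvVal (is.foldl (fun res i => if (FreeL g).getD i false = true then
          pvSetI res (i / g.headI.length) (i % g.headI.length)
            (if (CntD g).getD ((LabF g).getD i 0) 0 = m then 3 else 5) else res) res) p.1 p.2 =
        pvVal res p.1 p.2 := by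
  intro is
  induction is with
  | nil => intro res p _; rfl
  | cons i is ih =>
    intro res p hno
    rw [List.foldl_cons]
    by_cases h : (FreeL g).getD i false = true
    · rw [if_pos h]
      rw [ih _ p (fun j hj => hno j (List.mem_cons_of_mem _ hj))]
      exact val_setI_other (by
        have := hno i List.mem_cons_self h
        simpa [Prod.ext_iff, eq_comm] using this)
    · rw [if_neg h]
      exact ih res p (fun j hj => hno j (List.mem_cons_of_mem _ hj))

lemma bfold_set (g : List (List Int)) (m : Nat) :
    ∀ (is : List Nat) (res : List (List Int)) (p : Nat × Nat),
      (∀ i ∈ is, i < g.length * g.headI.length) →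
      IdxP g p ∈ is → p.2 < g.headI.length →
      (FreeL g).getD (IdxP g p) false = true →
      p.1 < res.length → p.2 < (res.getD p.1 []).length →
      pvVal (is.foldl (fun res i => if (FreeL g).getD i false = true then
          pvSetI res (i / g.headI.length) (i % g.headI.length)
            (if (CntD g).getD ((LabF g).getD i 0) 0 = m then 3 else 5) else res) res) p.1 p.2 =
        (if (CntD g).getD ((LabF g).getD (IdxP g p) 0) 0 = m then 3 else 5) := by
  intro is
  induction is with
  | nil => intro res p _ hin; simp at hin
  | cons i is ih =>
    intro res p hbound hin hpc hfree hr1 hr2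
    have hC : 0 < g.headI.length := by omega
    rw [List.foldl_cons]
    by_cases hip : i = IdxP g p
    · subst hip
      rw [if_pos hfree]
      have hcoords : (IdxP g p / g.headI.length, IdxP g p % g.headI.length) = p := by
        show EncP g (IdxP g p) = p
        exact encp_idxp g hpc
      by_cases htail : IdxP g p ∈ is
      · exact ih _ p (fun j hj => hbound j (List.mem_cons_of_mem _ hj)) htail hpc hfree
          (by rw [len_setI]; exact hr1) (by rw [rowlen_setI]; exact hr2)
      · rw [bfold_untouched g m is _ p ?hno]
        case hno =>
          intro j hj _ hje
          have hjn : j < g.length * g.headI.length := hbound j (List.mem_cons_of_mem _ hj)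
          have : IdxP g ((j / g.headI.length, j % g.headI.length)) = j := idx_enc hC
          rw [hje] at this
          exact htail (this ▸ hj)
        have hfin : pvVal (pvSetI res (IdxP g p / g.headI.length) (IdxP g p % g.headI.length)
            (if (CntD g).getD ((LabF g).getD (IdxP g p) 0) 0 = m then 3 else 5)) p.1 p.2 =
            (if (CntD g).getD ((LabF g).getD (IdxP g p) 0) 0 = m then 3 else 5) := by
          have h1 : IdxP g p / g.headI.length = p.1 := by
            have := congrArg Prod.fst hcoords; simpa using this
          have h2 : IdxP g p % g.headI.length = p.2 := by
            have := congrArg Prod.snd hcoords; simpa using this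
          rw [h1, h2]
          exact val_setI_same hr1 hr2
        rw [hfin]
    · have hne : (i / g.headI.length, i % g.headI.length) ≠ p := by
        intro hje
        have hjn : i < g.length * g.headI.length := hbound i List.mem_cons_self
        have h3 : IdxP g ((i / g.headI.length, i % g.headI.length)) = i := idx_enc hC
        rw [hje] at h3
        exact hip h3.symm
      have hin' : IdxP g p ∈ is := by
        rcases List.mem_cons.1 hin with h | h
        · exact absurd h.symm hip
        · exact h
      by_cases h : (FreeL g).getD i false = true
      · rw [if_pos h]
        exact ih _ p (fun j hj => hbound j (List.mem_cons_of_mem _ hj)) hin' hpc hfree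
          (by rw [len_setI]; exact hr1) (by rw [rowlen_setI]; exact hr2)
      · rw [if_neg h]
        exact ih _ p (fun j hj => hbound j (List.mem_cons_of_mem _ hj)) hin' hpc hfree hr1 hr2

lemma match_max (l : List Nat) :
    (match l with | [] => (0:Nat) | v :: vs => vs.foldl max v) = l.foldl max 0 := by
  cases l with
  | nil => rfl
  | cons v vs => rw [List.foldl_cons, Nat.zero_max]

lemma max_bridge (g : List (List Int)) (regs : List (List (Nat × Nat)))
    (hregs : ∀ reg ∈ regs, reg.Nodup ∧ ∃ srep, FreeP g srep ∧
      ∀ p : Nat × Nat, (p ∈ reg ↔ ReachP g srep p))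
    (hcover : ∀ p : Nat × Nat, FreeP g p → ∃ reg ∈ regs, p ∈ reg) :
    ((regs.map List.length).foldl max 0) = (CntD g).values.foldl max 0 := by
  apply le_antisymm
  · rcases PySem.List.foldl_max_mem (regs.map List.length) 0 with h0 | hmem
    · rw [h0]; exact Nat.zero_le _
    · obtain ⟨reg, hreg, hlen⟩ := List.mem_map.1 hmem
      obtain ⟨hnd, srep, hsfree, hregiff⟩ := hregs reg hreg
      have hsin : srep ∈ reg := (hregiff srep).2 Relation.ReflTransGen.refl
      have hsz : reg.length = SzF g srep := region_length g hregiff hnd hsfree hsin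
      have hkmem : (LabF g).getD (IdxP g srep) 0 ∈ (CntD g).keys := by
        rw [cntD_keys g, PySem.Set.mem_ofList, mem_keysL]
        exact ⟨IdxP g srep, idxp_lt g hsfree, free_idxp g hsfree, rfl⟩
      have hvmem : SzF g srep ∈ (CntD g).values := by
        rw [PySem.Dict.values_eq_map_keys (CntD g) (cntD_keys_nodup g) 0]
        exact List.mem_map.2 ⟨_, hkmem, rfl⟩
      rw [← hlen, hsz]
      exact (PySem.List.le_foldl_max (CntD g).values 0).2 _ hvmem
  · rw [PySem.Dict.values_eq_map_keys (CntD g) (cntD_keys_nodup g) 0]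
    rcases PySem.List.foldl_max_mem ((CntD g).keys.map (fun k => (CntD g).getD k 0)) 0 with h0 | hmem
    · rw [h0]; exact Nat.zero_le _
    · obtain ⟨k, hk, hkv⟩ := List.mem_map.1 hmem
      rw [cntD_keys g, PySem.Set.mem_ofList, mem_keysL] at hk
      obtain ⟨i, hi, hfree_i, hlab⟩ := hk
      have hC : 0 < g.headI.length := by
        rcases Nat.eq_zero_or_pos g.headI.length with hz | h
        · rw [hz, Nat.mul_zero] at hi; omega
        · exact h
      have hpfree : FreeP g (EncP g i) := (freeL_iff' g hi).1 hfree_i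
      have hszp : (CntD g).getD k 0 = SzF g (EncP g i) := by
        unfold SzF
        rw [show IdxP g (EncP g i) = i from idx_enc hC, hlab]
      obtain ⟨reg, hreg, hpin⟩ := hcover _ hpfree
      obtain ⟨hnd, srep, hsfree, hregiff⟩ := hregs reg hreg
      have hsz : reg.length = SzF g (EncP g i) := region_length g hregiff hnd hsfree hpin
      rw [← hkv, hszp, ← hsz]
      exact (PySem.List.le_foldl_max (regs.map List.length) 0).2 _
        (List.mem_map.2 ⟨reg, hreg, rfl⟩)

lemma lists_eq {res1 res2 : List (List Int)} (hlen : res1.length = res2.length)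
    (hrow : ∀ i, i < res1.length → (res1.getD i []).length = (res2.getD i []).length)
    (hval : ∀ r c, r < res1.length → c < (res1.getD r []).length →
      pvVal res1 r c = pvVal res2 r c) : res1 = res2 := by
  refine List.ext_getElem hlen ?_
  intro i h1 h2
  refine List.ext_getElem ?_ ?_
  · have := hrow i h1
    rw [List.getD_eq_getElem _ _ h1, List.getD_eq_getElem _ _ h2] at this
    exact this
  · intro c hc1 hc2
    have := hval i c h1 (by rw [List.getD_eq_getElem _ _ h1]; exact hc1)
    unfold pvVal at this
    rw [List.getD_eq_getElem _ _ h1, List.getD_eq_getElem _ _ h2] at this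
    rw [List.getD_eq_getElem _ _ hc1, List.getD_eq_getElem _ _ hc2] at this
    exact this

lemma transformB_eq (g : List (List Int)) :
    transform_alt g =
      if (FreeL g).contains true = true then
        (List.range (g.length * g.headI.length)).foldl (fun res i =>
          if (FreeL g).getD i false = true then
            pvSetI res (i / g.headI.length) (i % g.headI.length)
              (if (CntD g).getD ((LabF g).getD i 0) 0 =
                  (match (CntD g).values with | [] => 0 | v :: vs => vs.foldl max v)
                then 3 else 5)
          else res) (g.map (fun row => row.map id))
      else g.map (fun row => row.map id) := rfl

lemma transformA_eq (g : List (List Int)) :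
    transform g =
      (match ((List.range g.length).foldl (fun st r =>
          (List.range g.headI.length).foldl (fun st c =>
            if pvGetB st.1 r c = false then
              (let p := pvBfs g.length g.headI.length r c st.1; (p.1, st.2 ++ [p.2]))
            else st) st)
          ((List.range g.length).foldl (fun vis r =>
            (List.range g.headI.length).foldl (fun vis c =>
              if pvVal g r c = 2 then pvSetB vis r c else vis) vis)
            (List.replicate g.length (List.replicate g.headI.length false)), [])).2 with
      | [] => g.map (fun row => row.map id)
      | reg0 :: rest =>
        (reg0 :: rest).foldl (fun res region =>
          region.foldl (fun res p => pvSetI res p.1 p.2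
            (if region.length = ((reg0 :: rest).map List.length).foldl max 0 then 3 else 5)) res)
          (g.map (fun row => row.map id))) := rfl

theorem transform_spec' (g : List (List Int)) (hpre : Pre_transform g) :
    transform g = transform_alt g := by
  obtain ⟨hgne, hrows⟩ := hpre
  have hres0 : g.map (fun row : List Int => row.map id) = g := by simp
  rw [transformA_eq, transformB_eq, hres0]
  -- visited characterization
  obtain ⟨hWFv, hviffRaw⟩ := markAll_spec g (List.range g.length)
    (List.replicate g.length (List.replicate g.headI.length false))
    (fun r hr => List.mem_range.1 hr) WFV_rep
  have hvis_iff : ∀ p : Nat × Nat, p.1 < g.length → p.2 < g.headI.length →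
      (pvGetB ((List.range g.length).foldl (fun vis r =>
        (List.range g.headI.length).foldl (fun vis c =>
          if pvVal g r c = 2 then pvSetB vis r c else vis) vis)
        (List.replicate g.length (List.replicate g.headI.length false))) p.1 p.2 = true ↔
        ¬ FreeP g p) := by
    intro p hpa hpb
    rw [hviffRaw p]
    rw [getB_rep]
    constructor
    · rintro (h | ⟨_, _, hval⟩)
      · exact absurd ⟨hpa, hpb⟩ h
      · intro hf; exact hf.2 hval
    · intro hnf
      have hval : pvVal g p.1 p.2 = 2 := by
        by_contra hv
        exact hnf ⟨⟨hpa, hpb⟩, hv⟩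
      exact Or.inr ⟨List.mem_range.2 hpa, hpb, hval⟩
  have hInv0 : ScanInv g (((List.range g.length).foldl (fun vis r =>
      (List.range g.headI.length).foldl (fun vis c =>
        if pvVal g r c = 2 then pvSetB vis r c else vis) vis)
      (List.replicate g.length (List.replicate g.headI.length false))), []) := by
    refine ⟨hWFv, ?_, ?_, ?_⟩
    · intro p hpa hpb hnf
      exact (hvis_iff p hpa hpb).2 hnf
    · intro p hf
      constructor
      · intro h
        exact absurd hf ((hvis_iff p hf.1.1 hf.1.2).1 h)
      · rintro ⟨reg, hreg, _⟩
        exact absurd hreg (by simp)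
    · intro reg hreg
      exact absurd hreg (by simp)
  obtain ⟨⟨hWFs, hpaths, hfreeiff, hregs⟩, _, hallvis⟩ :=
    scanRows_spec g (List.range g.length) _ (fun r hr => List.mem_range.1 hr) hInv0
  have hcover : ∀ p : Nat × Nat, FreeP g p →
      ∃ reg ∈ ((List.range g.length).foldl (fun st r =>
        (List.range g.headI.length).foldl (fun st c =>
          if pvGetB st.1 r c = false then
            (let p := pvBfs g.length g.headI.length r c st.1; (p.1, st.2 ++ [p.2]))
          else st) st)
        ((List.range g.length).foldl (fun vis r =>
          (List.range g.headI.length).foldl (fun vis c =>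
            if pvVal g r c = 2 then pvSetB vis r c else vis) vis)
          (List.replicate g.length (List.replicate g.headI.length false)), [])).2, p ∈ reg := by
    intro p hf
    exact (hfreeiff p hf).1 (hallvis p (List.mem_range.2 hf.1.1) hf.1.2)
  by_cases hfx : ∃ p : Nat × Nat, FreeP g p
  · -- main case: at least one free cell
    obtain ⟨p0, hp0⟩ := hfx
    have hC : 0 < g.headI.length := by have := hp0.1.2; omega
    have hcont : (FreeL g).contains true = true := by
      have hmem : (true : Bool) ∈ FreeL g := by
        have hgd := free_idxp g hp0
        have hlen : IdxP g p0 < (FreeL g).length := by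
          unfold FreeL
          rw [List.length_map, List.length_range]
          exact idxp_lt g hp0
        rw [← hgd, List.getD_eq_getElem _ _ hlen]
        exact List.getElem_mem hlen
      exact List.elem_eq_true_of_mem hmem
    rw [if_pos hcont]
    -- the scan's regions are nonempty
    obtain ⟨reg0, hreg0, hp0in⟩ := hcover p0 hp0
    cases hsc : ((List.range g.length).foldl (fun st r =>
        (List.range g.headI.length).foldl (fun st c =>
          if pvGetB st.1 r c = false then
            (let p := pvBfs g.length g.headI.length r c st.1; (p.1, st.2 ++ [p.2]))
          else st) st)
        ((List.range g.length).foldl (fun vis r =>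
          (List.range g.headI.length).foldl (fun vis c =>
            if pvVal g r c = 2 then pvSetB vis r c else vis) vis)
          (List.replicate g.length (List.replicate g.headI.length false)), [])).2 with
    | nil => rw [hsc] at hreg0; exact absurd hreg0 (by simp)
    | cons r0 rest =>
    rw [hsc] at hregs hcover
    have hmax : ((r0 :: rest).map List.length).foldl max 0 = (CntD g).values.foldl max 0 :=
      max_bridge g (r0 :: rest) hregs hcover
    have hm : (match (CntD g).values with | [] => 0 | v :: vs => vs.foldl max v) =
        (CntD g).values.foldl max 0 := match_max _
    -- pointwise equality
    obtain ⟨a1, a2, a3, a4⟩ := colorAll_spec (((r0 :: rest).map List.length).foldl max 0) (r0 :: rest) g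
    obtain ⟨b1, b2⟩ := bfold_shapes g (match (CntD g).values with | [] => 0 | v :: vs => vs.foldl max v)
      (List.range (g.length * g.headI.length)) g
    refine lists_eq (by rw [a1, b1]) (fun i _ => by rw [a2 i, b2 i]) ?_
    intro r c hr hc
    rw [a1] at hr
    rw [a2] at hc
    have hrowlen : g.headI.length ≤ (g.getD r []).length := by
      have : g.getD r [] ∈ g := by
        rw [List.getD_eq_getElem _ _ hr]
        exact List.getElem_mem hr
      exact hrows _ this
    by_cases hfp : FreeP g (r, c)
    · -- free cell: both sides give the colour determined by component size vs max
      have hex := hcover (r, c) hfp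
      have hcol : ∀ reg ∈ (r0 :: rest), (r, c) ∈ reg →
          (if reg.length = ((r0 :: rest).map List.length).foldl max 0 then (3:Int) else 5) =
          (if SzF g (r, c) = (CntD g).values.foldl max 0 then (3:Int) else 5) := by
        intro reg hreg hin
        obtain ⟨hnd, srep, hsfree, hregiff⟩ := hregs reg hreg
        rw [region_length g hregiff hnd hsfree hin, hmax]
      have hA := a4 (r, c) (if SzF g (r, c) = (CntD g).values.foldl max 0 then (3:Int) else 5)
        hcol hex hr hc
      have hB := bfold_set g (match (CntD g).values with | [] => 0 | v :: vs => vs.foldl max v)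
        (List.range (g.length * g.headI.length)) g (r, c)
        (fun j hj => List.mem_range.1 hj)
        (List.mem_range.2 (idxp_lt g hfp)) hfp.1.2 (free_idxp g hfp) hr hc
      rw [hA, hB, hm]
      rfl
    · -- non-free cell: both sides leave the original value
      have hA := a3 (r, c) (by
        intro reg hreg hin
        obtain ⟨hnd, srep, hsfree, hregiff⟩ := hregs reg hreg
        exact hfp (reach_free ((hregiff (r, c)).1 hin) hsfree))
      have hB := bfold_untouched g
        (match (CntD g).values with | [] => 0 | v :: vs => vs.foldl max v)
        (List.range (g.length * g.headI.length)) g (r, c) (by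
          intro j hj hjfree hje
          have hjn : j < g.length * g.headI.length := List.mem_range.1 hj
          have : FreeP g (EncP g j) := (freeL_iff' g hjn).1 hjfree
          rw [show EncP g j = (j / g.headI.length, j % g.headI.length) from rfl, hje] at this
          exact hfp this)
      rw [hA, hB]
  · -- no free cell: both sides return the untouched copy
    have hcont : (FreeL g).contains true = false := by
      by_contra hcon
      have h1 : (FreeL g).contains true = true := by
        rcases Bool.eq_false_or_eq_true ((FreeL g).contains true) with h | h
        · exact h
        · exact absurd h hcon
      have hmem : (true : Bool) ∈ FreeL g := List.mem_of_elem_eq_true h1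
      unfold FreeL at hmem
      obtain ⟨i, hi, hdec⟩ := List.mem_map.1 hmem
      have hin : i < g.length * g.headI.length := List.mem_range.1 hi
      have hb := enc_lt hin
      refine hfx ⟨(i / g.headI.length, i % g.headI.length), ⟨hb.1, hb.2⟩, ?_⟩
      show pvVal g (i / g.headI.length) (i % g.headI.length) ≠ 2
      exact of_decide_eq_true hdec
    rw [hcont]
    have hnil : ((List.range g.length).foldl (fun st r =>
        (List.range g.headI.length).foldl (fun st c =>
          if pvGetB st.1 r c = false then
            (let p := pvBfs g.length g.headI.length r c st.1; (p.1, st.2 ++ [p.2]))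
          else st) st)
        ((List.range g.length).foldl (fun vis r =>
          (List.range g.headI.length).foldl (fun vis c =>
            if pvVal g r c = 2 then pvSetB vis r c else vis) vis)
          (List.replicate g.length (List.replicate g.headI.length false)), [])).2 = [] := by
      cases hsc : ((List.range g.length).foldl (fun st r =>
          (List.range g.headI.length).foldl (fun st c =>
            if pvGetB st.1 r c = false then
              (let p := pvBfs g.length g.headI.length r c st.1; (p.1, st.2 ++ [p.2]))
            else st) st)
          ((List.range g.length).foldl (fun vis r =>
            (List.range g.headI.length).foldl (fun vis c =>
              if pvVal g r c = 2 then pvSetB vis r c else vis) vis)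
            (List.replicate g.length (List.replicate g.headI.length false)), [])).2 with
      | nil => rfl
      | cons a l =>
        rw [hsc] at hregs
        obtain ⟨_, srep, hsfree, _⟩ := hregs a List.mem_cons_self
        exact absurd ⟨srep, hsfree⟩ hfx
    rw [hnil]
    simp

-- ===== VERDICT (by name: the statement is the Claim_ definition above) =====
theorem transform_spec : Claim_equal_transform :=
  fun g _hdom hpre => transform_spec' g hpre
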